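-- pv_equiv track=rewrite | github.com/jjoshua2/arc_agi | unsolved/2025-10-02T21-13-22Z/6a1e5592_best1.py | transform
-- ===== SOURCE A (Python) =====
-- def find_components(grid):
--     if not grid or not grid[0]:
--         return []
--     rows = len(grid)
--     cols = len(grid[0])
--     visited = set()
--     components = []
--     for r in range(rows):
--         for c in range(cols):
--             if grid[r][c] == 5 and (r, c) not in visited:
--                 component = []
--                 stack = [(r, c)]
--                 visited.add((r, c))
--                 while stack:
--                     cr, cc = stack.pop()
--                     component.append((cr, cc))
--                     for dr, dc in [(-1, 0), (1, 0), (0, -1), (0, 1)]: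
--                         nr, nc = cr + dr, cc + dc
--                         if 0 <= nr < rows and 0 <= nc < cols and grid[nr][nc] == 5 and (nr, nc) not in visited:
--                             visited.add((nr, nc))
--                             stack.append((nr, nc))
--                 components.append(component)
--     return components
--
-- def transform(grid_lst):
--     if not grid_lst or not grid_lst[0]:
--         return []
--     rows = len(grid_lst)
--     cols = len(grid_lst[0])
--     output = [row[:] for row in grid_lst]
--     components = find_components(grid_lst)
--     for comp in components:
--         poss = comp
--         minr = min(p[0] for p in poss)
--         maxr = max(p[0] for p in poss)
--         minc = min(p[1] for p in poss)
--         maxc = max(p[1] for p in poss)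
--         height = maxr - minr + 1
--         width = maxc - minc + 1
--         half_h = height // 2
--         left_w = width // 2
--         above_r = minr - 1
--         below_r = maxr + 1
--         left_above = 0
--         right_above = 0
--         left_below = 0
--         right_below = 0
--         if above_r >= 0:
--             lcol = minc - 1
--             if 0 <= lcol < cols:
--                 left_above = grid_lst[above_r][lcol]
--             rcol = maxc + 1
--             if 0 <= rcol < cols:
--                 right_above = grid_lst[above_r][rcol]
--         if below_r < rows:
--             lcol = minc - 1
--             if 0 <= lcol < cols:
--                 left_below = grid_lst[below_r][lcol]
--             rcol = maxc + 1
--             if 0 <= rcol < cols: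
--                 right_below = grid_lst[below_r][rcol]
--         # Fill upper half
--         for i in range(minr, minr + half_h):
--             for j in range(minc, minc + left_w):
--                 output[i][j] = left_above
--             for j in range(minc + left_w, maxc + 1):
--                 output[i][j] = right_above
--         # Fill lower half
--         for i in range(minr + half_h, maxr + 1):
--             for j in range(minc, minc + left_w):
--                 output[i][j] = left_below
--             for j in range(minc + left_w, maxc + 1):
--                 output[i][j] = right_below
--         # Set border colors to 0
--         if above_r >= 0:
--             lcol = minc - 1
--             if 0 <= lcol < cols and grid_lst[above_r][lcol] != 0:
--                 output[above_r][lcol] = 0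
--             rcol = maxc + 1
--             if 0 <= rcol < cols and grid_lst[above_r][rcol] != 0:
--                 output[above_r][rcol] = 0
--         if below_r < rows:
--             lcol = minc - 1
--             if 0 <= lcol < cols and grid_lst[below_r][lcol] != 0:
--                 output[below_r][lcol] = 0
--             rcol = maxc + 1
--             if 0 <= rcol < cols and grid_lst[below_r][rcol] != 0:
--                 output[below_r][rcol] = 0
--     return output
-- ===== SOURCE B (Python) =====
-- def transform(grid_lst):
--     if not grid_lst or not grid_lst[0]:
--         return []
--     rows = len(grid_lst)
--     cols = len(grid_lst[0])
--     n = rows * cols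
--     # Union-find over row-major cell indices; the root of a class is always
--     # its smallest (row-major) member, so no rank/size bookkeeping is needed.
--     parent = list(range(n))
--
--     def find(x):
--         while parent[x] != x:
--             x = parent[x]
--         return x
--
--     def union(a, b):
--         ra = find(a)
--         rb = find(b)
--         if ra < rb:
--             parent[rb] = ra
--         elif rb < ra:
--             parent[ra] = rb
--
--     for r in range(rows):
--         for c in range(cols):
--             if grid_lst[r][c] == 5:
--                 if r > 0 and grid_lst[r - 1][c] == 5:
--                     union(r * cols + c, (r - 1) * cols + c)
--                 if c > 0 and grid_lst[r][c - 1] == 5: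
--                     union(r * cols + c, r * cols + c - 1)
--
--     # Group 5-cells by root.  A class's first scanned cell is its smallest,
--     # i.e. its root, so groups appear in the same order as A's DFS seeds.
--     groups = {}
--     for r in range(rows):
--         for c in range(cols):
--             if grid_lst[r][c] == 5:
--                 groups.setdefault(find(r * cols + c), []).append((r, c))
--
--     output = [row[:] for row in grid_lst]
--     for comp in groups.values():
--         poss = comp
--         minr = min(p[0] for p in poss)
--         maxr = max(p[0] for p in poss)
--         minc = min(p[1] for p in poss)
--         maxc = max(p[1] for p in poss)
--         height = maxr - minr + 1
--         width = maxc - minc + 1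
--         half_h = height // 2
--         left_w = width // 2
--         above_r = minr - 1
--         below_r = maxr + 1
--         left_above = 0
--         right_above = 0
--         left_below = 0
--         right_below = 0
--         if above_r >= 0:
--             lcol = minc - 1
--             if 0 <= lcol < cols:
--                 left_above = grid_lst[above_r][lcol]
--             rcol = maxc + 1
--             if 0 <= rcol < cols:
--                 right_above = grid_lst[above_r][rcol]
--         if below_r < rows:
--             lcol = minc - 1
--             if 0 <= lcol < cols:
--                 left_below = grid_lst[below_r][lcol]
--             rcol = maxc + 1
--             if 0 <= rcol < cols:
--                 right_below = grid_lst[below_r][rcol]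
--         for i in range(minr, minr + half_h):
--             for j in range(minc, minc + left_w):
--                 output[i][j] = left_above
--             for j in range(minc + left_w, maxc + 1):
--                 output[i][j] = right_above
--         for i in range(minr + half_h, maxr + 1):
--             for j in range(minc, minc + left_w):
--                 output[i][j] = left_below
--             for j in range(minc + left_w, maxc + 1):
--                 output[i][j] = right_below
--         if above_r >= 0:
--             lcol = minc - 1
--             if 0 <= lcol < cols and grid_lst[above_r][lcol] != 0:
--                 output[above_r][lcol] = 0
--             rcol = maxc + 1
--             if 0 <= rcol < cols and grid_lst[above_r][rcol] != 0:
--                 output[above_r][rcol] = 0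
--         if below_r < rows:
--             lcol = minc - 1
--             if 0 <= lcol < cols and grid_lst[below_r][lcol] != 0:
--                 output[below_r][lcol] = 0
--             rcol = maxc + 1
--             if 0 <= rcol < cols and grid_lst[below_r][rcol] != 0:
--                 output[below_r][rcol] = 0
--     return output
-- ===== Notes on version B (the rewrite author's own statement) =====
-- stated objective: alternative
-- what changed: Replaces the DFS stack flood fill with a union-find over row-major cell indices (union-to-minimum, so each class's root is its first row-major cell), then groups 5-cells by root into components in the same first-seen order; the bounding-box fill stays as in A.
import Mathlib
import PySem

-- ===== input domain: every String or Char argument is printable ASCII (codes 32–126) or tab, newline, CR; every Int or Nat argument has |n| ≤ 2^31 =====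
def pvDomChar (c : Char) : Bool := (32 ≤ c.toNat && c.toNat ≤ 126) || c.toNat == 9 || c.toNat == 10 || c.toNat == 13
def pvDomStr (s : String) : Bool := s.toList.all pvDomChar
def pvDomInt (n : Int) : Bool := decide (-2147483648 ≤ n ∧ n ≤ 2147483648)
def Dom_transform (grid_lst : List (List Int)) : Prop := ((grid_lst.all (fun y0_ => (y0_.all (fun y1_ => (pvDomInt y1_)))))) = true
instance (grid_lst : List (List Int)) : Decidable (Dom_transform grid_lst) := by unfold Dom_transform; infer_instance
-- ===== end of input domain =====

-- ===== PORT A =====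
-- B replaces A's DFS flood fill by union-find over row-major indices (union-to-minimum);
-- the identical bounding-box fill of both Pythons is ported once (pvSet2/pvFillComp) and shared.

-- grid[r][c]; wherever called, 0 ≤ r < len(g) and 0 ≤ c < len(g[r]) hold, so pyGet? is exact
def pvGet (g : List (List Int)) (r c : Int) : Int :=
  (PySem.List.pyGet? ((PySem.List.pyGet? g r).getD []) c).getD 0

def pvDirs : List (Int × Int) := [(-1, 0), (1, 0), (0, -1), (0, 1)]

def pvPush (g : List (List Int)) (rows cols : Int) (p : Int × Int)
    (sv : List (Int × Int) × PySem.Set (Int × Int)) (d : Int × Int) :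
    List (Int × Int) × PySem.Set (Int × Int) :=
  let q := (p.1 + d.1, p.2 + d.2)
  if 0 ≤ q.1 ∧ q.1 < rows ∧ 0 ≤ q.2 ∧ q.2 < cols ∧ pvGet g q.1 q.2 = 5 ∧ q ∉ sv.2 then
    (q :: sv.1, PySem.Set.add sv.2 q)
  else sv

theorem pvPush_fold_spec (g : List (List Int)) (rows cols : Int) (p : Int × Int)
    (ds : List (Int × Int)) (rest : List (Int × Int)) (vis : PySem.Set (Int × Int)) :
    ∃ extra : List (Int × Int),
      ds.foldl (pvPush g rows cols p) (rest, vis) = (extra.reverse ++ rest, vis ++ extra) ∧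
      extra.Nodup ∧
      (∀ e ∈ extra, (0 ≤ e.1 ∧ e.1 < rows ∧ 0 ≤ e.2 ∧ e.2 < cols) ∧ pvGet g e.1 e.2 = 5 ∧
        e ∉ vis ∧ ∃ d ∈ ds, e = (p.1 + d.1, p.2 + d.2)) ∧
      (∀ d ∈ ds, (0 ≤ p.1 + d.1 ∧ p.1 + d.1 < rows ∧ 0 ≤ p.2 + d.2 ∧ p.2 + d.2 < cols ∧
          pvGet g (p.1 + d.1) (p.2 + d.2) = 5 ∧ (p.1 + d.1, p.2 + d.2) ∉ vis) →
          (p.1 + d.1, p.2 + d.2) ∈ extra) := by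
  induction ds generalizing rest vis with
  | nil => exact ⟨[], by simp, by simp, by simp, by simp⟩
  | cons d ds ih =>
    simp only [List.foldl_cons]
    by_cases h : 0 ≤ p.1 + d.1 ∧ p.1 + d.1 < rows ∧ 0 ≤ p.2 + d.2 ∧ p.2 + d.2 < cols ∧
        pvGet g (p.1 + d.1) (p.2 + d.2) = 5 ∧ (p.1 + d.1, p.2 + d.2) ∉ vis
    · have hstep : pvPush g rows cols p (rest, vis) d =
        ((p.1 + d.1, p.2 + d.2) :: rest, vis ++ [(p.1 + d.1, p.2 + d.2)]) := by
        simp only [pvPush]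
        rw [if_pos h, PySem.Set.add_of_not_mem h.2.2.2.2.2]
      rw [hstep]
      obtain ⟨extra, heq, hnd, hmem, hcomp⟩ := ih ((p.1 + d.1, p.2 + d.2) :: rest) (vis ++ [(p.1 + d.1, p.2 + d.2)])
      refine ⟨(p.1 + d.1, p.2 + d.2) :: extra, ?_, ?_, ?_, ?_⟩
      · rw [heq]; simp
      · refine List.nodup_cons.2 ⟨fun hq => ((hmem _ hq).2.2.1 (by simp)).elim, hnd⟩
      · intro e he
        rcases List.mem_cons.1 he with rfl | he
        · exact ⟨⟨h.1, h.2.1, h.2.2.1, h.2.2.2.1⟩, h.2.2.2.2.1, h.2.2.2.2.2, ⟨d, by simp⟩⟩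
        · obtain ⟨h1, h2, h3, ⟨d', hd', he'⟩⟩ := hmem e he
          exact ⟨h1, h2, fun hv => h3 (by simp [hv]), ⟨d', by simp [hd'], he'⟩⟩
      · intro d' hd' hcond
        rcases List.mem_cons.1 hd' with rfl | hd'
        · exact List.mem_cons_self ..
        · by_cases hsame : (p.1 + d'.1, p.2 + d'.2) = ((p.1 + d.1, p.2 + d.2) : Int × Int)
          · rw [hsame]; exact List.mem_cons_self ..
          · refine List.mem_cons_of_mem _ (hcomp d' hd' ⟨hcond.1, hcond.2.1, hcond.2.2.1, hcond.2.2.2.1, hcond.2.2.2.2.1, ?_⟩)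
            simp only [List.mem_append, List.mem_singleton]
            rintro (hv | hv)
            · exact hcond.2.2.2.2.2 hv
            · exact hsame hv
    · have hstep : pvPush g rows cols p (rest, vis) d = (rest, vis) := by
        simp only [pvPush]
        rw [if_neg (by exact_mod_cast h)]
      rw [hstep]
      obtain ⟨extra, heq, hnd, hmem, hcomp⟩ := ih rest vis
      refine ⟨extra, heq, hnd, ?_, ?_⟩
      · intro e he
        obtain ⟨h1, h2, h3, ⟨d', hd', he'⟩⟩ := hmem e he
        exact ⟨h1, h2, h3, ⟨d', by simp [hd'], he'⟩⟩
      · intro d' hd' hcond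
        rcases List.mem_cons.1 hd' with rfl | hd'
        · exact (h hcond).elim
        · exact hcomp d' hd' hcond

def pvAllCells (rows cols : Int) : Finset (Int × Int) :=
  (PySem.List.pyRange 0 rows 1).toFinset ×ˢ (PySem.List.pyRange 0 cols 1).toFinset

def pvFlood (g : List (List Int)) (rows cols : Int)
    (stack : List (Int × Int)) (visited : PySem.Set (Int × Int)) (component : List (Int × Int)) :
    List (Int × Int) × PySem.Set (Int × Int) :=
  match stack with
  | [] => (component, visited)
  | p :: rest =>
      let sv := pvDirs.foldl (pvPush g rows cols p) (rest, visited)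
      pvFlood g rows cols sv.1 sv.2 (component ++ [p])
  termination_by ((pvAllCells rows cols \ visited.toFinset).card, stack.length)
  decreasing_by
    obtain ⟨extra, heq, hnd, hmem, -⟩ := pvPush_fold_spec g rows cols p pvDirs rest visited
    match extra, heq, hmem with
    | [], heq, _ =>
      rw [heq]
      simp only [List.reverse_nil, List.nil_append, List.append_nil]
      right
      · simp
    | e :: extra', heq, hmem =>
      rw [heq]
      left
      apply Finset.card_lt_card
      constructor
      · refine Finset.sdiff_subset_sdiff (Finset.Subset.refl _) ?_
        intro x hx
        simp only [List.toFinset_append, Finset.mem_union, List.mem_toFinset] at *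
        exact Or.inl hx
      · intro hsub
        obtain ⟨⟨hr0, hr1, hc0, hc1⟩, h5, hnv, -⟩ := hmem e (by simp)
        have he_all : e ∈ pvAllCells rows cols := by
          simp only [pvAllCells, Finset.mem_product, List.mem_toFinset,
            PySem.List.mem_pyRange_one]
          omega
        have h1 : e ∈ pvAllCells rows cols \ visited.toFinset := by
          simp only [Finset.mem_sdiff, List.mem_toFinset]
          exact ⟨he_all, hnv⟩
        have h2 := hsub h1
        simp only [Finset.mem_sdiff, List.toFinset_append, Finset.mem_union, List.mem_toFinset] at h2
        exact h2.2 (Or.inr (by simp))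

def pvFindComponents (grid : List (List Int)) : List (List (Int × Int)) :=
  match grid with
  | [] => []
  | row0 :: _ =>
    if row0 = [] then [] else
    let rows : Int := grid.length
    let cols : Int := row0.length
    ((PySem.List.pyRange 0 rows 1).foldl (fun st r =>
      (PySem.List.pyRange 0 cols 1).foldl
        (fun (st : PySem.Set (Int × Int) × List (List (Int × Int))) c =>
          if pvGet grid r c = 5 ∧ (r, c) ∉ st.1 then
            let res := pvFlood grid rows cols [(r, c)] (PySem.Set.add st.1 (r, c)) []
            (res.2, st.2 ++ [res.1])
          else st) st) (([] : PySem.Set (Int × Int)), ([] : List (List (Int × Int))))).2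

-- output[i][j] = v; i and j are provably in range wherever this is called (Python exact there)
def pvSet2 (out : List (List Int)) (i j : Int) (v : Int) : List (List Int) :=
  out.modify i.toNat (fun row => row.set j.toNat v)

-- the bounding-box fill over one component: this code is identical in both Pythons, ported
-- once and used by both ports; comp is nonempty wherever called so the .getD 0 defaults are dead
def pvFillComp (g : List (List Int)) (rows cols : Int) (out0 : List (List Int))
    (comp : List (Int × Int)) : List (List Int) :=
  let minr := (PySem.List.min? (comp.map Prod.fst) (fun x => x)).getD 0
  let maxr := (PySem.List.max? (comp.map Prod.fst) (fun x => x)).getD 0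
  let minc := (PySem.List.min? (comp.map Prod.snd) (fun x => x)).getD 0
  let maxc := (PySem.List.max? (comp.map Prod.snd) (fun x => x)).getD 0
  let height := maxr - minr + 1
  let width := maxc - minc + 1
  let half_h := PySem.Int.floordiv height 2
  let left_w := PySem.Int.floordiv width 2
  let above_r := minr - 1
  let below_r := maxr + 1
  let left_above := if 0 ≤ above_r ∧ 0 ≤ minc - 1 ∧ minc - 1 < cols then pvGet g above_r (minc - 1) else 0
  let right_above := if 0 ≤ above_r ∧ 0 ≤ maxc + 1 ∧ maxc + 1 < cols then pvGet g above_r (maxc + 1) else 0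
  let left_below := if below_r < rows ∧ 0 ≤ minc - 1 ∧ minc - 1 < cols then pvGet g below_r (minc - 1) else 0
  let right_below := if below_r < rows ∧ 0 ≤ maxc + 1 ∧ maxc + 1 < cols then pvGet g below_r (maxc + 1) else 0
  let out1 := (PySem.List.pyRange minr (minr + half_h) 1).foldl (fun out i =>
      let out' := (PySem.List.pyRange minc (minc + left_w) 1).foldl (fun out j => pvSet2 out i j left_above) out
      (PySem.List.pyRange (minc + left_w) (maxc + 1) 1).foldl (fun out j => pvSet2 out i j right_above) out') out0
  let out2 := (PySem.List.pyRange (minr + half_h) (maxr + 1) 1).foldl (fun out i =>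
      let out' := (PySem.List.pyRange minc (minc + left_w) 1).foldl (fun out j => pvSet2 out i j left_below) out
      (PySem.List.pyRange (minc + left_w) (maxc + 1) 1).foldl (fun out j => pvSet2 out i j right_below) out') out1
  let out3 := if 0 ≤ above_r ∧ 0 ≤ minc - 1 ∧ minc - 1 < cols ∧ pvGet g above_r (minc - 1) ≠ 0 then pvSet2 out2 above_r (minc - 1) 0 else out2
  let out4 := if 0 ≤ above_r ∧ 0 ≤ maxc + 1 ∧ maxc + 1 < cols ∧ pvGet g above_r (maxc + 1) ≠ 0 then pvSet2 out3 above_r (maxc + 1) 0 else out3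
  let out5 := if below_r < rows ∧ 0 ≤ minc - 1 ∧ minc - 1 < cols ∧ pvGet g below_r (minc - 1) ≠ 0 then pvSet2 out4 below_r (minc - 1) 0 else out4
  let out6 := if below_r < rows ∧ 0 ≤ maxc + 1 ∧ maxc + 1 < cols ∧ pvGet g below_r (maxc + 1) ≠ 0 then pvSet2 out5 below_r (maxc + 1) 0 else out5
  out6

def transform (grid_lst : List (List Int)) : List (List Int) :=
  match grid_lst with
  | [] => []
  | row0 :: _ =>
    if row0 = [] then [] else
    let rows : Int := grid_lst.length
    let cols : Int := row0.length
    let output := grid_lst.map (fun row => row)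
    (pvFindComponents grid_lst).foldl (fun out comp => pvFillComp grid_lst rows cols out comp) output

-- ===== PORT B =====
-- find(x): while parent[x] != x: x = parent[x].  The fuel argument only guards termination;
-- parent.length fuel always suffices because parent chains strictly decrease.
def pvFind (parent : List Int) : Nat → Int → Int
  | 0, x => x
  | fuel + 1, x =>
    let px := (PySem.List.pyGet? parent x).getD x
    if px = x then x else pvFind parent fuel px

def pvRoot (parent : List Int) (x : Int) : Int := pvFind parent parent.length x

def pvUnion (parent : List Int) (a b : Int) : List Int :=
  let ra := pvRoot parent a
  let rb := pvRoot parent b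
  if ra < rb then parent.set rb.toNat ra
  else if rb < ra then parent.set ra.toNat rb
  else parent

def pvBuildParent (g : List (List Int)) (rows cols : Int) : List Int :=
  (PySem.List.pyRange 0 rows 1).foldl (fun parent r =>
    (PySem.List.pyRange 0 cols 1).foldl (fun parent c =>
      if pvGet g r c = 5 then
        let parent' := if 0 < r ∧ pvGet g (r - 1) c = 5 then pvUnion parent (r * cols + c) ((r - 1) * cols + c) else parent
        if 0 < c ∧ pvGet g r (c - 1) = 5 then pvUnion parent' (r * cols + c) (r * cols + c - 1) else parent'
      else parent) parent) (PySem.List.pyRange 0 (rows * cols) 1)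

def pvGroups (g : List (List Int)) (rows cols : Int) (parent : List Int) :
    PySem.Dict Int (List (Int × Int)) :=
  (PySem.List.pyRange 0 rows 1).foldl (fun d r =>
    (PySem.List.pyRange 0 cols 1).foldl
      (fun (d : PySem.Dict Int (List (Int × Int))) c =>
        if pvGet g r c = 5 then d.modify (pvRoot parent (r * cols + c)) [] (fun l => l ++ [(r, c)]) else d) d)
    PySem.Dict.empty

def transform_alt (grid_lst : List (List Int)) : List (List Int) :=
  match grid_lst with
  | [] => []
  | row0 :: _ =>
    if row0 = [] then [] else
    let rows : Int := grid_lst.length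
    let cols : Int := row0.length
    let parent := pvBuildParent grid_lst rows cols
    let output := grid_lst.map (fun row => row)
    ((pvGroups grid_lst rows cols parent).values).foldl
      (fun out comp => pvFillComp grid_lst rows cols out comp) output

-- ===== PRECONDITION & SPEC =====
-- Pre_ excludes exactly the ragged grids on which Python A raises IndexError
-- (some row shorter than the first row); A returns normally on every other input.
def Pre_transform (grid_lst : List (List Int)) : Prop :=
  ∀ row ∈ grid_lst, (grid_lst.headD []).length ≤ row.length
instance (grid_lst : List (List Int)) : Decidable (Pre_transform grid_lst) := by
  unfold Pre_transform; infer_instance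
def pvWitness_transform : List (List Int) := [[5, 0], [5, 1]]
def Spec_transform (grid_lst : List (List Int)) (out : List (List Int)) : Prop := out = transform_alt grid_lst
instance (grid_lst : List (List Int)) (out : List (List Int)) : Decidable (Spec_transform grid_lst out) := by unfold Spec_transform; infer_instance

-- ===== CLAIM (what is proved, stated in full; the proofs are below) =====
def Claim_equal_transform : Prop := ∀ (grid_lst : List (List Int)), Dom_transform grid_lst → Pre_transform grid_lst → Spec_transform grid_lst (transform grid_lst)

-- ===== LEMMAS AND PROOFS =====

-- ---- proof-side vocabulary ----
def pvRows (g : List (List Int)) : Int := g.length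
def pvCols (g : List (List Int)) : Int := (g.headD []).length
def pvInR (g : List (List Int)) (p : Int × Int) : Prop :=
  0 ≤ p.1 ∧ p.1 < pvRows g ∧ 0 ≤ p.2 ∧ p.2 < pvCols g
def pvFive (g : List (List Int)) (p : Int × Int) : Prop := pvInR g p ∧ pvGet g p.1 p.2 = 5
def pvAdj (g : List (List Int)) (p q : Int × Int) : Prop :=
  pvFive g p ∧ pvFive g q ∧
    ((p.1 = q.1 ∧ (q.2 = p.2 + 1 ∨ q.2 = p.2 - 1)) ∨ (p.2 = q.2 ∧ (q.1 = p.1 + 1 ∨ q.1 = p.1 - 1)))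
def pvConn (g : List (List Int)) : (Int × Int) → (Int × Int) → Prop := Relation.EqvGen (pvAdj g)
def pvRmLt (p q : Int × Int) : Prop := p.1 < q.1 ∨ (p.1 = q.1 ∧ p.2 < q.2)
def pvIsMin (g : List (List Int)) (p : Int × Int) : Prop :=
  pvFive g p ∧ ∀ q, pvFive g q → pvConn g p q → ¬ pvRmLt q p
def pvCellsRM (g : List (List Int)) : List (Int × Int) :=
  (PySem.List.pyRange 0 (pvRows g) 1).flatMap (fun r =>
    (PySem.List.pyRange 0 (pvCols g) 1).map (fun c => (r, c)))
noncomputable def pvMinsOn (g : List (List Int)) (P : List (Int × Int)) : List (Int × Int) :=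
  P.filter (fun p => @decide (pvIsMin g p) (Classical.propDecidable _))
noncomputable def pvMins (g : List (List Int)) : List (Int × Int) := pvMinsOn g (pvCellsRM g)
noncomputable def pvFilterConn (g : List (List Int)) (P : List (Int × Int)) (m : Int × Int) :
    List (Int × Int) :=
  P.filter (fun q => @decide (pvFive g q ∧ pvConn g m q) (Classical.propDecidable _))
noncomputable def pvClassList (g : List (List Int)) (m : Int × Int) : List (Int × Int) :=
  pvFilterConn g (pvCellsRM g) m
def pvCompRel (g : List (List Int)) (comp : List (Int × Int)) (m : Int × Int) : Prop :=
  comp.Nodup ∧ ∀ q, q ∈ comp ↔ (pvFive g q ∧ pvConn g m q)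
def pvIdx (g : List (List Int)) (p : Int × Int) : Int := p.1 * pvCols g + p.2

-- ---- basic facts ----
theorem pv_adj_symm (g : List (List Int)) {p q : Int × Int} (h : pvAdj g p q) : pvAdj g q p := by
  obtain ⟨h1, h2, h3⟩ := h
  exact ⟨h2, h1, by rcases h3 with ⟨e, h⟩ | ⟨e, h⟩ <;> [left; right] <;> omega⟩

theorem pv_conn_refl (g : List (List Int)) (p : Int × Int) : pvConn g p p := Relation.EqvGen.refl p
theorem pv_conn_symm (g : List (List Int)) {p q : Int × Int} (h : pvConn g p q) : pvConn g q p :=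
  Relation.EqvGen.symm _ _ h
theorem pv_conn_trans (g : List (List Int)) {p q r : Int × Int} (h1 : pvConn g p q)
    (h2 : pvConn g q r) : pvConn g p r := Relation.EqvGen.trans _ _ _ h1 h2

theorem pv_conn_five_iff (g : List (List Int)) {p q : Int × Int} (h : pvConn g p q) :
    pvFive g p ↔ pvFive g q := by
  induction h with
  | rel _ _ h => exact ⟨fun _ => h.2.1, fun _ => h.1⟩
  | refl => exact Iff.rfl
  | symm _ _ _ ih => exact ih.symm
  | trans _ _ _ _ _ ih1 ih2 => exact ih1.trans ih2

theorem pv_mem_cellsRM (g : List (List Int)) (p : Int × Int) :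
    p ∈ pvCellsRM g ↔ pvInR g p := by
  simp only [pvCellsRM, List.mem_flatMap, List.mem_map, PySem.List.mem_pyRange_one, pvInR]
  constructor
  · rintro ⟨r, hr, c, hc, rfl⟩; exact ⟨hr.1, hr.2, hc.1, hc.2⟩
  · rintro ⟨h1, h2, h3, h4⟩; exact ⟨p.1, ⟨h1, h2⟩, p.2, ⟨h3, h4⟩, Prod.mk.eta⟩

theorem pv_pairwise_cellsRM (g : List (List Int)) : (pvCellsRM g).Pairwise pvRmLt := by
  rw [pvCellsRM, List.pairwise_flatMap]
  constructor
  · intro r _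
    rw [List.pairwise_map]
    exact (PySem.List.pairwise_lt_pyRange_one 0 (pvCols g)).imp (fun h => Or.inr ⟨rfl, h⟩)
  · refine (PySem.List.pairwise_lt_pyRange_one 0 (pvRows g)).imp ?_
    intro a b hab x hx y hy
    simp only [List.mem_map] at hx hy
    obtain ⟨c1, -, rfl⟩ := hx
    obtain ⟨c2, -, rfl⟩ := hy
    exact Or.inl hab

theorem pv_rmLt_ne {p q : Int × Int} (h : pvRmLt p q) : p ≠ q := by
  rintro rfl; rcases h with h | h <;> omega

theorem pv_nodup_cellsRM (g : List (List Int)) : (pvCellsRM g).Nodup :=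
  List.nodup_iff_pairwise_ne.2 ((pv_pairwise_cellsRM g).imp pv_rmLt_ne)

-- membership in a union-of-classes set is invariant along a connection
theorem pv_conn_mem_closed (g : List (List Int)) (V : List (Int × Int))
    (hV : ∀ p q, p ∈ V → pvAdj g p q → q ∈ V) {a b : Int × Int} (h : pvConn g a b) :
    a ∈ V ↔ b ∈ V := by
  induction h with
  | rel x y h => exact ⟨fun hx => hV x y hx h, fun hy => hV y x hy (pv_adj_symm g h)⟩
  | refl => exact Iff.rfl
  | symm _ _ _ ih => exact ih.symm
  | trans _ _ _ _ _ ih1 ih2 => exact ih1.trans ih2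

theorem pv_adj_of_dir (g : List (List Int)) {p q d : Int × Int} (hd : d ∈ pvDirs)
    (hp : pvFive g p) (hq : pvFive g q) (he : q = (p.1 + d.1, p.2 + d.2)) : pvAdj g p q := by
  refine ⟨hp, hq, ?_⟩
  simp only [pvDirs, List.mem_cons, List.not_mem_nil, or_false] at hd
  subst he
  rcases hd with rfl | rfl | rfl | rfl <;> simp <;> omega

theorem pv_adj_dirs (g : List (List Int)) {p q : Int × Int} (h : pvAdj g p q) :
    ∃ d ∈ pvDirs, q = (p.1 + d.1, p.2 + d.2) := by
  obtain ⟨-, -, h⟩ := h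
  rcases h with ⟨h1, h2 | h2⟩ | ⟨h1, h2 | h2⟩
  · exact ⟨(0, 1), by simp [pvDirs], by rw [Prod.ext_iff]; constructor <;> simp <;> omega⟩
  · exact ⟨(0, -1), by simp [pvDirs], by rw [Prod.ext_iff]; constructor <;> simp <;> omega⟩
  · exact ⟨(1, 0), by simp [pvDirs], by rw [Prod.ext_iff]; constructor <;> simp <;> omega⟩
  · exact ⟨(-1, 0), by simp [pvDirs], by rw [Prod.ext_iff]; constructor <;> simp <;> omega⟩

-- ---- A side: the DFS flood fill computes the connected class ----
theorem pvFlood_spec (g : List (List Int)) (s : Int × Int)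
    (stack comp : List (Int × Int)) (vis : PySem.Set (Int × Int)) (V0 : List (Int × Int))
    (hV0 : ∀ p q, p ∈ V0 → pvAdj g p q → q ∈ V0)
    (hvis : ∀ p, p ∈ vis ↔ (p ∈ V0 ∨ p ∈ comp ∨ p ∈ stack))
    (hcs : ∀ p, p ∈ comp ∨ p ∈ stack → pvFive g p ∧ pvConn g s p ∧ p ∉ V0)
    (hcl : ∀ p ∈ comp, ∀ q, pvAdj g p q → q ∈ vis)
    (hnd : (comp ++ stack).Nodup) (hvnd : vis.Nodup) :
    (∀ p, p ∈ (pvFlood g (pvRows g) (pvCols g) stack vis comp).2 ↔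
        (p ∈ V0 ∨ p ∈ (pvFlood g (pvRows g) (pvCols g) stack vis comp).1)) ∧
    (∀ p, p ∈ comp ∨ p ∈ stack → p ∈ (pvFlood g (pvRows g) (pvCols g) stack vis comp).1) ∧
    (∀ p ∈ (pvFlood g (pvRows g) (pvCols g) stack vis comp).1,
        pvFive g p ∧ pvConn g s p ∧ p ∉ V0) ∧
    (∀ p ∈ (pvFlood g (pvRows g) (pvCols g) stack vis comp).1, ∀ q, pvAdj g p q →
        q ∈ (pvFlood g (pvRows g) (pvCols g) stack vis comp).2) ∧
    (pvFlood g (pvRows g) (pvCols g) stack vis comp).1.Nodup ∧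
    (pvFlood g (pvRows g) (pvCols g) stack vis comp).2.Nodup := by
  revert hvis hcs hcl hnd hvnd
  induction stack, vis, comp using pvFlood.induct g (pvRows g) (pvCols g) with
  | case1 vis comp =>
    intro hvis hcs hcl hnd hvnd
    rw [pvFlood]
    simp only [List.not_mem_nil, or_false] at hvis hcs hnd ⊢
    exact ⟨hvis, fun p hp => hp, fun p hp => hcs p hp, hcl, by simpa using hnd, hvnd⟩
  | case2 vis comp p rest sv ih =>
    intro hvis hcs hcl hnd hvnd
    obtain ⟨extra, heq, hend, hemem, hecomp⟩ :=
      pvPush_fold_spec g (pvRows g) (pvCols g) p pvDirs rest vis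
    have hsv : sv = (extra.reverse ++ rest, vis ++ extra) := heq
    rw [hsv] at ih
    simp only [] at ih
    have hp5 : pvFive g p ∧ pvConn g s p ∧ p ∉ V0 := hcs p (Or.inr (List.mem_cons_self ..))
    have hVsub : ∀ x ∈ V0, x ∈ vis := fun x hx => (hvis x).2 (Or.inl hx)
    have hex : ∀ e ∈ extra, pvFive g e ∧ pvConn g s e ∧ e ∉ V0 ∧ pvAdj g p e := by
      intro e he
      obtain ⟨hr, h5, hnv, ⟨d, hd, hde⟩⟩ := hemem e he
      have hfe : pvFive g e := ⟨⟨hr.1, hr.2.1, hr.2.2.1, hr.2.2.2⟩, h5⟩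
      have hadj : pvAdj g p e := pv_adj_of_dir g hd hp5.1 hfe hde
      exact ⟨hfe, pv_conn_trans g hp5.2.1 (Relation.EqvGen.rel _ _ hadj),
        fun hV => hnv (hVsub e hV), hadj⟩
    have hdisj : ∀ e ∈ extra, e ∉ vis := fun e he => (hemem e he).2.2.1
    have hvis' : ∀ x, x ∈ vis ++ extra ↔
        (x ∈ V0 ∨ x ∈ comp ++ [p] ∨ x ∈ extra.reverse ++ rest) := by
      intro x
      simp only [List.mem_append, List.mem_reverse, hvis x,
        List.mem_cons]
      tauto
    have hcs' : ∀ x, x ∈ comp ++ [p] ∨ x ∈ extra.reverse ++ rest →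
        pvFive g x ∧ pvConn g s x ∧ x ∉ V0 := by
      intro x hx
      simp only [List.mem_append, List.mem_singleton, List.mem_reverse] at hx
      rcases hx with (hx | rfl) | (hx | hx)
      · exact hcs x (Or.inl hx)
      · exact hp5
      · exact ⟨(hex x hx).1, (hex x hx).2.1, (hex x hx).2.2.1⟩
      · exact hcs x (Or.inr (List.mem_cons_of_mem _ hx))
    have hcl' : ∀ x ∈ comp ++ [p], ∀ q, pvAdj g x q → q ∈ vis ++ extra := by
      intro x hx q hadj
      simp only [List.mem_append, List.mem_singleton] at hx
      rcases hx with hx | rfl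
      · exact List.mem_append.2 (Or.inl (hcl x hx q hadj))
      · by_cases hqv : q ∈ vis
        · exact List.mem_append.2 (Or.inl hqv)
        · obtain ⟨d, hd, hqd⟩ := pv_adj_dirs g hadj
          have h5q := hadj.2.1
          subst hqd
          exact List.mem_append.2 (Or.inr (hecomp d hd
            ⟨h5q.1.1, h5q.1.2.1, h5q.1.2.2.1, h5q.1.2.2.2, h5q.2, hqv⟩))
    have h2 : (extra.reverse ++ rest).Perm (rest ++ extra) :=
      ((extra.reverse_perm.append rest.perm_rfl).trans List.perm_append_comm)
    have hperm : ((comp ++ [p]) ++ (extra.reverse ++ rest)).Perm ((comp ++ p :: rest) ++ extra) := by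
      have h3 : (comp ++ p :: (extra.reverse ++ rest)).Perm (comp ++ p :: (rest ++ extra)) :=
        comp.perm_rfl.append (h2.cons p)
      simpa [List.append_assoc] using h3
    have hstacksub : ∀ x, x ∈ comp ∨ x ∈ p :: rest → x ∈ vis := fun x hx =>
      (hvis x).2 (Or.inr hx)
    have hnd' : ((comp ++ [p]) ++ (extra.reverse ++ rest)).Nodup := by
      refine hperm.nodup_iff.2 ?_
      rw [List.nodup_append]
      refine ⟨hnd, hend, ?_⟩
      intro x hx y hy hxy
      subst hxy
      exact hdisj x hy (hstacksub x (List.mem_append.1 hx))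
    have hvnd' : (vis ++ extra).Nodup := by
      rw [List.nodup_append]
      refine ⟨hvnd, hend, ?_⟩
      intro x hx y hy hxy
      subst hxy
      exact hdisj x hy hx
    have hout := ih hvis' hcs' hcl' hnd' hvnd'
    rw [pvFlood]
    simp only [heq]
    obtain ⟨o1, o2, o3, o4, o5, o6⟩ := hout
    refine ⟨o1, ?_, o3, o4, o5, o6⟩
    intro x hx
    apply o2
    rcases hx with hx | hx
    · exact Or.inl (List.mem_append.2 (Or.inl hx))
    · rcases List.mem_cons.1 hx with rfl | hx
      · exact Or.inl (List.mem_append.2 (Or.inr (List.mem_singleton.2 rfl)))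
      · exact Or.inr (List.mem_append.2 (Or.inr hx))

theorem pvFlood_class (g : List (List Int)) (s : Int × Int) (V0 : PySem.Set (Int × Int))
    (hV0 : ∀ p q, p ∈ V0 → pvAdj g p q → q ∈ V0)
    (hs5 : pvFive g s) (hsV : s ∉ V0) (hvnd : V0.Nodup) :
    (∀ q, q ∈ (pvFlood g (pvRows g) (pvCols g) [s] (PySem.Set.add V0 s) []).1 ↔
        (pvFive g q ∧ pvConn g s q)) ∧
    (∀ q, q ∈ (pvFlood g (pvRows g) (pvCols g) [s] (PySem.Set.add V0 s) []).2 ↔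
        (q ∈ V0 ∨ (pvFive g q ∧ pvConn g s q))) ∧
    (pvFlood g (pvRows g) (pvCols g) [s] (PySem.Set.add V0 s) []).1.Nodup ∧
    (pvFlood g (pvRows g) (pvCols g) [s] (PySem.Set.add V0 s) []).2.Nodup := by
  have hadd : PySem.Set.add V0 s = V0 ++ [s] := PySem.Set.add_of_not_mem hsV
  rw [hadd]
  obtain ⟨o1, o2, o3, o4, o5, o6⟩ := pvFlood_spec g s [s] [] (V0 ++ [s]) V0 hV0
    (by intro p; simp [List.mem_append])
    (by rintro p (hp | hp)
        · simp at hp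
        · simp only [List.mem_singleton] at hp
          subst hp
          exact ⟨hs5, pv_conn_refl g p, hsV⟩)
    (by intro p hp; simp at hp)
    (by simp)
    (by rw [List.nodup_append]
        refine ⟨hvnd, List.nodup_singleton s, ?_⟩
        intro x hx y hy hxy
        subst hxy
        simp only [List.mem_singleton] at hy
        subst hy
        exact hsV hx)
  have hsin : s ∈ (pvFlood g (pvRows g) (pvCols g) [s] (V0 ++ [s]) []).1 :=
    o2 s (Or.inr (List.mem_singleton.2 rfl))
  have key : ∀ a b, pvConn g a b → pvFive g a → pvFive g b →
      (a ∈ (pvFlood g (pvRows g) (pvCols g) [s] (V0 ++ [s]) []).1 ↔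
       b ∈ (pvFlood g (pvRows g) (pvCols g) [s] (V0 ++ [s]) []).1) := by
    intro a b h
    induction h with
    | rel x y hxy =>
      intro _ _
      constructor
      · intro hx
        have hy2 := o4 x hx y hxy
        rcases (o1 y).1 hy2 with hy | hy
        · exfalso
          have hconn : pvConn g s y :=
            pv_conn_trans g ((o3 x hx).2.1) (Relation.EqvGen.rel _ _ hxy)
          exact hsV ((pv_conn_mem_closed g V0 hV0 hconn).2 hy)
        · exact hy
      · intro hy
        have hx2 := o4 y hy x (pv_adj_symm g hxy)
        rcases (o1 x).1 hx2 with hx | hx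
        · exfalso
          have hconn : pvConn g s x :=
            pv_conn_trans g ((o3 y hy).2.1)
              (Relation.EqvGen.rel _ _ (pv_adj_symm g hxy))
          exact hsV ((pv_conn_mem_closed g V0 hV0 hconn).2 hx)
        · exact hx
    | refl x => intro _ _; exact Iff.rfl
    | symm x y hxy ih => intro h1 h2; exact (ih h2 h1).symm
    | trans x y z hxy hyz ih1 ih2 =>
      intro h1 h2
      have h3 : pvFive g y := (pv_conn_five_iff g hxy).1 h1
      exact (ih1 h1 h3).trans (ih2 h3 h2)
  have hchar : ∀ q, q ∈ (pvFlood g (pvRows g) (pvCols g) [s] (V0 ++ [s]) []).1 ↔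
      (pvFive g q ∧ pvConn g s q) := by
    intro q
    constructor
    · intro hq; exact ⟨(o3 q hq).1, (o3 q hq).2.1⟩
    · rintro ⟨h5, hc⟩
      exact (key s q hc hs5 h5).1 hsin
  refine ⟨hchar, ?_, o5, o6⟩
  intro q
  rw [o1 q, hchar q]

def pvStepF (g : List (List Int)) (st : PySem.Set (Int × Int) × List (List (Int × Int)))
    (pc : Int × Int) : PySem.Set (Int × Int) × List (List (Int × Int)) :=
  if pvGet g pc.1 pc.2 = 5 ∧ pc ∉ st.1 then
    ((pvFlood g (pvRows g) (pvCols g) [pc] (PySem.Set.add st.1 pc) []).2,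
     st.2 ++ [(pvFlood g (pvRows g) (pvCols g) [pc] (PySem.Set.add st.1 pc) []).1])
  else st

theorem pv_foldl_nested {σ : Type} (f : σ → (Int × Int) → σ) (rs cs : List Int) (init : σ) :
    rs.foldl (fun st r => cs.foldl (fun st c => f st (r, c)) st) init
      = (rs.flatMap (fun r => cs.map (fun c => (r, c)))).foldl f init := by
  induction rs generalizing init with
  | nil => rfl
  | cons r rs ih =>
    simp only [List.foldl_cons, List.flatMap_cons, List.foldl_append, List.foldl_map, ih]

theorem pv_rmLt_asymm {p q : Int × Int} (h1 : pvRmLt p q) (h2 : pvRmLt q p) : False := by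
  rcases h1 with h1 | h1 <;> rcases h2 with h2 | h2 <;> omega

theorem pv_prefix_char (g : List (List Int)) (P S : List (Int × Int)) (x : Int × Int)
    (hsplit : pvCellsRM g = P ++ x :: S) :
    pvInR g x ∧ (∀ y, y ∈ P ↔ (pvInR g y ∧ pvRmLt y x)) := by
  have hpw := pv_pairwise_cellsRM g
  rw [hsplit] at hpw
  have hmem := fun y => (pv_mem_cellsRM g y)
  simp only [hsplit] at hmem
  constructor
  · exact (hmem x).1 (by simp)
  · intro y
    constructor
    · intro hy
      refine ⟨(hmem y).1 (by simp [hy]), ?_⟩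
      have := (List.pairwise_append.1 hpw).2.2 y hy x (by simp)
      exact this
    · rintro ⟨hin, hlt⟩
      have hy : y ∈ P ++ x :: S := (hmem y).2 hin
      rcases List.mem_append.1 hy with hy | hy
      · exact hy
      · rcases List.mem_cons.1 hy with rfl | hy
        · exact absurd hlt (fun h => pv_rmLt_asymm h h)
        · exfalso
          have := (List.pairwise_cons.1 (List.pairwise_append.1 hpw).2.1).1 y hy
          exact pv_rmLt_asymm hlt this

theorem pv_minsOn_append (g : List (List Int)) (P Q : List (Int × Int)) :
    pvMinsOn g (P ++ Q) = pvMinsOn g P ++ pvMinsOn g Q := by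
  simp [pvMinsOn, List.filter_append]

theorem pv_minsOn_singleton_min (g : List (List Int)) (x : Int × Int) (h : pvIsMin g x) :
    pvMinsOn g [x] = [x] := by
  simp only [pvMinsOn, List.filter]
  rw [show @decide (pvIsMin g x) (Classical.propDecidable _) = true from @decide_eq_true _ (Classical.propDecidable _) h]

theorem pv_minsOn_singleton_not (g : List (List Int)) (x : Int × Int) (h : ¬ pvIsMin g x) :
    pvMinsOn g [x] = [] := by
  simp only [pvMinsOn, List.filter]
  rw [show @decide (pvIsMin g x) (Classical.propDecidable _) = false from @decide_eq_false _ (Classical.propDecidable _) h]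

theorem pv_scanA (g : List (List Int)) (S P : List (Int × Int))
    (hsplit : pvCellsRM g = P ++ S)
    (vis : PySem.Set (Int × Int)) (comps : List (List (Int × Int)))
    (hvis : ∀ p, p ∈ vis ↔ (pvFive g p ∧ ∃ y ∈ P, pvFive g y ∧ pvConn g y p))
    (hvnd : vis.Nodup)
    (hf2 : List.Forall₂ (pvCompRel g) comps (pvMinsOn g P)) :
    List.Forall₂ (pvCompRel g) (S.foldl (pvStepF g) (vis, comps)).2 (pvMinsOn g (P ++ S)) := by
  induction S generalizing P vis comps with
  | nil => simpa using hf2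
  | cons x S ih =>
    obtain ⟨hxin, hbefore⟩ := pv_prefix_char g P S x hsplit
    have hsplit' : pvCellsRM g = (P ++ [x]) ++ S := by simpa using hsplit
    have hclosed : ∀ p q, p ∈ vis → pvAdj g p q → q ∈ vis := by
      intro p q hp hadj
      obtain ⟨h5p, y, hyP, h5y, hconn⟩ := (hvis p).1 hp
      exact (hvis q).2 ⟨hadj.2.1, y, hyP, h5y,
        pv_conn_trans g hconn (Relation.EqvGen.rel _ _ hadj)⟩
    rw [List.foldl_cons]
    by_cases hc : pvGet g x.1 x.2 = 5 ∧ x ∉ vis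
    · have h5x : pvFive g x := ⟨hxin, hc.1⟩
      have hmin : pvIsMin g x := by
        refine ⟨h5x, ?_⟩
        intro q h5q hconn hlt
        have hqP : q ∈ P := (hbefore q).2 ⟨h5q.1, hlt⟩
        exact hc.2 ((hvis x).2 ⟨h5x, q, hqP, h5q, pv_conn_symm g hconn⟩)
      obtain ⟨c1, c2, c3, c4⟩ := pvFlood_class g x vis hclosed h5x hc.2 hvnd
      have hstep : pvStepF g (vis, comps) x =
          ((pvFlood g (pvRows g) (pvCols g) [x] (PySem.Set.add vis x) []).2,
           comps ++ [(pvFlood g (pvRows g) (pvCols g) [x] (PySem.Set.add vis x) []).1]) := by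
        simp only [pvStepF]
        rw [if_pos hc]
      rw [hstep]
      have hvis' : ∀ p, p ∈ (pvFlood g (pvRows g) (pvCols g) [x] (PySem.Set.add vis x) []).2 ↔
          (pvFive g p ∧ ∃ y ∈ P ++ [x], pvFive g y ∧ pvConn g y p) := by
        intro p
        rw [c2 p]
        constructor
        · rintro (hp | ⟨h5p, hconn⟩)
          · obtain ⟨h5p, y, hyP, h5y, hconn⟩ := (hvis p).1 hp
            exact ⟨h5p, y, List.mem_append.2 (Or.inl hyP), h5y, hconn⟩
          · exact ⟨h5p, x, List.mem_append.2 (Or.inr (by simp)), h5x, hconn⟩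
        · rintro ⟨h5p, y, hy, h5y, hconn⟩
          rcases List.mem_append.1 hy with hy | hy
          · exact Or.inl ((hvis p).2 ⟨h5p, y, hy, h5y, hconn⟩)
          · rcases List.mem_singleton.1 hy
            exact Or.inr ⟨h5p, hconn⟩
      have hf2' : List.Forall₂ (pvCompRel g)
          (comps ++ [(pvFlood g (pvRows g) (pvCols g) [x] (PySem.Set.add vis x) []).1])
          (pvMinsOn g (P ++ [x])) := by
        rw [pv_minsOn_append, pv_minsOn_singleton_min g x hmin]
        refine List.rel_append hf2 (List.forall₂_cons.2 ⟨⟨c3, ?_⟩, List.Forall₂.nil⟩)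
        intro q
        rw [c1 q]
      have := ih (P ++ [x]) hsplit'
        ((pvFlood g (pvRows g) (pvCols g) [x] (PySem.Set.add vis x) []).2)
        (comps ++ [(pvFlood g (pvRows g) (pvCols g) [x] (PySem.Set.add vis x) []).1])
        hvis' c4 hf2'
      simpa using this
    · have hstep : pvStepF g (vis, comps) x = (vis, comps) := by
        simp only [pvStepF]
        rw [if_neg hc]
      rw [hstep]
      have hnot5orvis : ¬ pvFive g x ∨ x ∈ vis := by
        by_cases h5 : pvGet g x.1 x.2 = 5
        · right
          by_contra hxv
          exact hc ⟨h5, hxv⟩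
        · left
          exact fun h => h5 h.2
      have hvis' : ∀ p, p ∈ vis ↔ (pvFive g p ∧ ∃ y ∈ P ++ [x], pvFive g y ∧ pvConn g y p) := by
        intro p
        rw [hvis p]
        constructor
        · rintro ⟨h5p, y, hyP, h5y, hconn⟩
          exact ⟨h5p, y, List.mem_append.2 (Or.inl hyP), h5y, hconn⟩
        · rintro ⟨h5p, y, hy, h5y, hconn⟩
          rcases List.mem_append.1 hy with hy | hy
          · exact ⟨h5p, y, hy, h5y, hconn⟩
          · rcases List.mem_singleton.1 hy
            rcases hnot5orvis with hn | hxv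
            · exact absurd h5y hn
            · obtain ⟨h5x, y0, hy0, h5y0, hconn0⟩ := (hvis x).1 hxv
              exact ⟨h5p, y0, hy0, h5y0, pv_conn_trans g hconn0 hconn⟩
      have hnotmin : ¬ pvIsMin g x := by
        rcases hnot5orvis with hn | hxv
        · exact fun h => hn h.1
        · intro hmin
          obtain ⟨h5x, y0, hy0, h5y0, hconn0⟩ := (hvis x).1 hxv
          exact hmin.2 y0 h5y0 (pv_conn_symm g hconn0) ((hbefore y0).1 hy0).2
      have hf2' : List.Forall₂ (pvCompRel g) comps (pvMinsOn g (P ++ [x])) := by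
        rw [pv_minsOn_append, pv_minsOn_singleton_not g x hnotmin, List.append_nil]
        exact hf2
      have := ih (P ++ [x]) hsplit' vis comps hvis' hvnd hf2'
      simpa using this

theorem pv_A_char (g : List (List Int)) :
    List.Forall₂ (pvCompRel g) (pvFindComponents g) (pvMins g) := by
  cases g with
  | nil =>
    have h1 : pvFindComponents [] = [] := rfl
    have h2 : pvCellsRM [] = [] := by
      simp [pvCellsRM, pvRows, PySem.List.pyRange_one_eq_nil]
    rw [h1, pvMins, h2]
    exact List.Forall₂.nil
  | cons row0 rest =>
    by_cases h0 : row0 = []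
    · have h1 : pvFindComponents (row0 :: rest) = [] := by
        simp [pvFindComponents, h0]
      have h2 : pvCellsRM (row0 :: rest) = [] := by
        have : pvCols (row0 :: rest) = 0 := by simp [pvCols, h0]
        simp [pvCellsRM, this, PySem.List.pyRange_one_eq_nil]
      rw [h1, pvMins, h2]
      exact List.Forall₂.nil
    · have hfc : pvFindComponents (row0 :: rest) =
          ((pvCellsRM (row0 :: rest)).foldl (pvStepF (row0 :: rest))
            (([] : PySem.Set (Int × Int)), ([] : List (List (Int × Int))))).2 := by
        show (if row0 = [] then [] else _) = _
        rw [if_neg h0]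
        exact congrArg Prod.snd (pv_foldl_nested (pvStepF (row0 :: rest))
          (PySem.List.pyRange 0 (pvRows (row0 :: rest)) 1)
          (PySem.List.pyRange 0 (pvCols (row0 :: rest)) 1)
          (([] : PySem.Set (Int × Int)), ([] : List (List (Int × Int)))))
      rw [hfc]
      have := pv_scanA (row0 :: rest) (pvCellsRM (row0 :: rest)) [] rfl [] []
        (by intro p; simp) List.nodup_nil
        (by rw [show pvMinsOn (row0 :: rest) [] = [] from rfl]; exact List.Forall₂.nil)
      simpa [pvMins] using this

-- ---- B side: union-find core ----
def pvDecr (parent : List Int) : Prop :=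
  ∀ k : Nat, k < parent.length → 0 ≤ parent.getD k 0 ∧ parent.getD k 0 ≤ (k : Int)

theorem pv_parent_access (parent : List Int) {x : Int} (h0 : 0 ≤ x)
    (h1 : x < (parent.length : Int)) :
    (PySem.List.pyGet? parent x).getD x = parent.getD x.toNat 0 := by
  have hx : x.toNat < parent.length := by omega
  have := PySem.List.pyGetD_of_nonneg parent (i := x) x h0
  rw [show (PySem.List.pyGet? parent x).getD x = PySem.List.pyGetD parent x x from rfl] at *
  rw [this]
  rw [List.getD_eq_getElem?_getD, List.getD_eq_getElem?_getD]
  simp [List.getElem?_eq_getElem hx]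

theorem pvFind_step (parent : List Int) (fuel : Nat) (x : Int) :
    pvFind parent (fuel + 1) x =
      if (PySem.List.pyGet? parent x).getD x = x then x
      else pvFind parent fuel ((PySem.List.pyGet? parent x).getD x) := rfl

theorem pvFind_stable (parent : List Int) (hd : pvDecr parent) :
    ∀ (k : Nat) (x : Int) (f1 f2 : Nat), 0 ≤ x → x < (parent.length : Int) → x.toNat ≤ k →
      x.toNat < f1 → x.toNat < f2 → pvFind parent f1 x = pvFind parent f2 x := by
  intro k
  induction k with
  | zero =>
    intro x f1 f2 h0 h1 hk hf1 hf2
    obtain ⟨a, rfl⟩ : ∃ a, f1 = a + 1 := ⟨f1 - 1, by omega⟩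
    obtain ⟨b, rfl⟩ : ∃ b, f2 = b + 1 := ⟨f2 - 1, by omega⟩
    rw [pvFind_step, pvFind_step, pv_parent_access parent h0 h1]
    have hx0 : x = 0 := by omega
    have := hd x.toNat (by omega)
    have hpx : parent.getD x.toNat 0 = x := by omega
    rw [if_pos hpx, if_pos hpx]
  | succ k ih =>
    intro x f1 f2 h0 h1 hk hf1 hf2
    obtain ⟨a, rfl⟩ : ∃ a, f1 = a + 1 := ⟨f1 - 1, by omega⟩
    obtain ⟨b, rfl⟩ : ∃ b, f2 = b + 1 := ⟨f2 - 1, by omega⟩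
    rw [pvFind_step, pvFind_step, pv_parent_access parent h0 h1]
    by_cases hpx : parent.getD x.toNat 0 = x
    · rw [if_pos hpx, if_pos hpx]
    · rw [if_neg hpx, if_neg hpx]
      have hb := hd x.toNat (by omega)
      have hlt : parent.getD x.toNat 0 < x := by omega
      exact ih (parent.getD x.toNat 0) a b (by omega) (by omega) (by omega) (by omega) (by omega)

theorem pvRoot_fixpoint (parent : List Int) {x : Int} (h0 : 0 ≤ x)
    (h1 : x < (parent.length : Int)) (hfix : parent.getD x.toNat 0 = x) :
    pvRoot parent x = x := by
  obtain ⟨a, ha⟩ : ∃ a, parent.length = a + 1 := ⟨parent.length - 1, by omega⟩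
  rw [pvRoot, ha, pvFind_step, pv_parent_access parent h0 h1, if_pos hfix]

theorem pvRoot_step (parent : List Int) (hd : pvDecr parent) {x : Int} (h0 : 0 ≤ x)
    (h1 : x < (parent.length : Int)) (hne : parent.getD x.toNat 0 ≠ x) :
    pvRoot parent x = pvRoot parent (parent.getD x.toNat 0) := by
  obtain ⟨a, ha⟩ : ∃ a, parent.length = a + 1 := ⟨parent.length - 1, by omega⟩
  rw [pvRoot, pvRoot, ha, pvFind_step, pv_parent_access parent h0 h1, if_neg hne]
  have hb := hd x.toNat (by omega)
  have hlt : parent.getD x.toNat 0 < x := by omega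
  exact pvFind_stable parent hd (parent.getD x.toNat 0).toNat (parent.getD x.toNat 0) a (a+1)
    (by omega) (by omega) (by omega) (by omega) (by omega)

theorem pvRoot_spec (parent : List Int) (hd : pvDecr parent) :
    ∀ (k : Nat) (x : Int), 0 ≤ x → x < (parent.length : Int) → x.toNat ≤ k →
      0 ≤ pvRoot parent x ∧ pvRoot parent x ≤ x ∧
        parent.getD (pvRoot parent x).toNat 0 = pvRoot parent x := by
  intro k
  induction k with
  | zero =>
    intro x h0 h1 hk
    have := hd x.toNat (by omega)
    have hfix : parent.getD x.toNat 0 = x := by omega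
    rw [pvRoot_fixpoint parent h0 h1 hfix]
    exact ⟨h0, le_refl x, hfix⟩
  | succ k ih =>
    intro x h0 h1 hk
    by_cases hfix : parent.getD x.toNat 0 = x
    · rw [pvRoot_fixpoint parent h0 h1 hfix]
      exact ⟨h0, le_refl x, hfix⟩
    · rw [pvRoot_step parent hd h0 h1 hfix]
      have hb := hd x.toNat (by omega)
      have hlt : parent.getD x.toNat 0 < x := by omega
      obtain ⟨o1, o2, o3⟩ := ih (parent.getD x.toNat 0) (by omega) (by omega) (by omega)
      exact ⟨o1, by omega, o3⟩

theorem pvDecr_set (parent : List Int) (hd : pvDecr parent) {M m : Int} (h0m : 0 ≤ m)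
    (hmM : m ≤ M) : pvDecr (parent.set M.toNat m) := by
  intro k hk
  rw [List.length_set] at hk
  by_cases hkM : k = M.toNat
  · subst hkM
    rw [List.getD_eq_getElem?_getD, List.getElem?_set_self (by omega)]
    simp only [Option.getD_some]
    omega
  · rw [List.getD_eq_getElem?_getD, List.getElem?_set_ne (by omega)]
    rw [← List.getD_eq_getElem?_getD]
    exact hd k hk

theorem pvRoot_update (parent : List Int) (hd : pvDecr parent) {M m : Int}
    (h0m : 0 ≤ m) (hmM : m < M) (h1M : M < (parent.length : Int))
    (hMfix : parent.getD M.toNat 0 = M) (hmfix : parent.getD m.toNat 0 = m) :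
    ∀ (k : Nat) (x : Int), 0 ≤ x → x < (parent.length : Int) → x.toNat ≤ k →
      pvRoot (parent.set M.toNat m) x = if pvRoot parent x = M then m else pvRoot parent x := by
  have hlen : ((parent.set M.toNat m).length : Int) = (parent.length : Int) := by
    simp [List.length_set]
  have hd' : pvDecr (parent.set M.toNat m) := pvDecr_set parent hd h0m (le_of_lt hmM)
  have hget' : ∀ j : Nat, j < parent.length →
      (parent.set M.toNat m).getD j 0 = if j = M.toNat then m else parent.getD j 0 := by
    intro j hj
    by_cases hjM : j = M.toNat
    · subst hjM
      rw [List.getD_eq_getElem?_getD, List.getElem?_set_self (by omega), if_pos rfl]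
      simp
    · rw [List.getD_eq_getElem?_getD, List.getElem?_set_ne (by omega), if_neg hjM,
        ← List.getD_eq_getElem?_getD]
  have hrootm' : pvRoot (parent.set M.toNat m) m = m := by
    apply pvRoot_fixpoint _ h0m (by rw [hlen]; omega)
    rw [hget' m.toNat (by omega), if_neg (by omega)]
    exact hmfix
  intro k
  induction k with
  | zero =>
    intro x h0 h1 hk
    have hx0 : x = 0 := by omega
    subst hx0
    have hfix : parent.getD 0 0 = 0 := by
      have := hd 0 (by omega)
      omega
    have hA : pvRoot parent 0 = 0 := pvRoot_fixpoint parent (by omega) h1 hfix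
    have hfix' : (parent.set M.toNat m).getD 0 0 = 0 := by
      rw [hget' 0 (by omega), if_neg (by omega)]
      exact hfix
    have hB : pvRoot (parent.set M.toNat m) 0 = 0 :=
      pvRoot_fixpoint _ (by omega) (by rw [hlen]; exact h1) hfix'
    rw [hA, hB, if_neg (by omega)]
  | succ k ih =>
    intro x h0 h1 hk
    by_cases hxM : x = M
    · have hM1 : M < (parent.length : Int) := hxM ▸ h1
      have hpx' : (parent.set M.toNat m).getD M.toNat 0 = m := by
        rw [hget' M.toNat (by omega), if_pos rfl]
      have hr1 : pvRoot (parent.set M.toNat m) M = m := by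
        rw [pvRoot_step _ hd' (by omega) (by rw [hlen]; exact hM1) (by rw [hpx']; omega),
          hpx', hrootm']
      have hr2 : pvRoot parent M = M := pvRoot_fixpoint parent (by omega) hM1 hMfix
      rw [hxM, hr1, hr2, if_pos rfl]
    · have hpx' : (parent.set M.toNat m).getD x.toNat 0 = parent.getD x.toNat 0 := by
        rw [hget' x.toNat (by omega), if_neg (by omega)]
      by_cases hfix : parent.getD x.toNat 0 = x
      · rw [pvRoot_fixpoint parent h0 h1 hfix,
          pvRoot_fixpoint _ h0 (by rw [hlen]; exact h1) (by rw [hpx']; exact hfix), if_neg hxM]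
      · have hb := hd x.toNat (by omega)
        have hlt : parent.getD x.toNat 0 < x := by omega
        rw [pvRoot_step parent hd h0 h1 hfix,
          pvRoot_step _ hd' h0 (by rw [hlen]; exact h1) (by rw [hpx']; exact hfix), hpx']
        exact ih (parent.getD x.toNat 0) (by omega) (by omega) (by omega)

-- ---- B side: edge connectivity and the union-find invariant ----
def pvRelE (E : List (Int × Int)) (a b : Int) : Prop := (a, b) ∈ E ∨ (b, a) ∈ E
def pvConnE (E : List (Int × Int)) : Int → Int → Prop := Relation.EqvGen (pvRelE E)

theorem pvConnE_refl (E : List (Int × Int)) (x : Int) : pvConnE E x x := Relation.EqvGen.refl x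
theorem pvConnE_symm (E : List (Int × Int)) {x y : Int} (h : pvConnE E x y) : pvConnE E y x :=
  Relation.EqvGen.symm _ _ h
theorem pvConnE_trans (E : List (Int × Int)) {x y z : Int} (h1 : pvConnE E x y)
    (h2 : pvConnE E y z) : pvConnE E x z := Relation.EqvGen.trans _ _ _ h1 h2

theorem pvConnE_nil {x y : Int} (h : pvConnE [] x y) : x = y := by
  induction h with
  | rel a b hab => rcases hab with h | h <;> simp at h
  | refl => rfl
  | symm _ _ _ ih => exact ih.symm
  | trans _ _ _ _ _ ih1 ih2 => exact ih1.trans ih2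

theorem pvConnE_mono {E F : List (Int × Int)} (hEF : ∀ e ∈ E, e ∈ F) {x y : Int}
    (h : pvConnE E x y) : pvConnE F x y := by
  refine Relation.EqvGen.mono ?_ h
  intro a b hab
  rcases hab with h | h
  · exact Or.inl (hEF _ h)
  · exact Or.inr (hEF _ h)

theorem pvConnE_append {E : List (Int × Int)} {e : Int × Int} {x y : Int} :
    pvConnE (E ++ [e]) x y ↔ pvConnE E x y ∨ (pvConnE E x e.1 ∧ pvConnE E e.2 y) ∨
      (pvConnE E x e.2 ∧ pvConnE E e.1 y) := by
  constructor
  · intro h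
    induction h with
    | rel a b hab =>
      rcases hab with h | h <;> rcases List.mem_append.1 h with h | h
      · exact Or.inl (Relation.EqvGen.rel _ _ (Or.inl h))
      · rcases List.mem_singleton.1 h with h2
        have h1 : a = e.1 := by rw [← h2]
        have h2' : b = e.2 := by rw [← h2]
        exact Or.inr (Or.inl ⟨h1 ▸ pvConnE_refl E a, h2' ▸ pvConnE_refl E b⟩)
      · exact Or.inl (Relation.EqvGen.rel _ _ (Or.inr h))
      · rcases List.mem_singleton.1 h with h2
        have h1 : b = e.1 := by rw [← h2]
        have h2' : a = e.2 := by rw [← h2]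
        exact Or.inr (Or.inr ⟨h2' ▸ pvConnE_refl E a, h1 ▸ pvConnE_refl E b⟩)
    | refl a => exact Or.inl (pvConnE_refl E a)
    | symm a b _ ih =>
      rcases ih with h | ⟨h1, h2⟩ | ⟨h1, h2⟩
      · exact Or.inl (pvConnE_symm E h)
      · exact Or.inr (Or.inr ⟨pvConnE_symm E h2, pvConnE_symm E h1⟩)
      · exact Or.inr (Or.inl ⟨pvConnE_symm E h2, pvConnE_symm E h1⟩)
    | trans a b c _ _ ih1 ih2 =>
      rcases ih1 with h1 | ⟨h1, h1'⟩ | ⟨h1, h1'⟩ <;>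
        rcases ih2 with h2 | ⟨h2, h2'⟩ | ⟨h2, h2'⟩
      · exact Or.inl (pvConnE_trans E h1 h2)
      · exact Or.inr (Or.inl ⟨pvConnE_trans E h1 h2, h2'⟩)
      · exact Or.inr (Or.inr ⟨pvConnE_trans E h1 h2, h2'⟩)
      · exact Or.inr (Or.inl ⟨h1, pvConnE_trans E h1' h2⟩)
      · exact Or.inr (Or.inl ⟨h1, h2'⟩)
      · exact Or.inl (pvConnE_trans E h1 h2')
      · exact Or.inr (Or.inr ⟨h1, pvConnE_trans E h1' h2⟩)
      · exact Or.inl (pvConnE_trans E h1 h2')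
      · exact Or.inr (Or.inr ⟨h1, h2'⟩)
  · intro h
    have hmono : ∀ {a b : Int}, pvConnE E a b → pvConnE (E ++ [e]) a b :=
      fun h => pvConnE_mono (fun f hf => List.mem_append.2 (Or.inl hf)) h
    have hedge : pvConnE (E ++ [e]) e.1 e.2 :=
      Relation.EqvGen.rel _ _ (Or.inl (List.mem_append.2 (Or.inr (by simp))))
    rcases h with h | ⟨h1, h2⟩ | ⟨h1, h2⟩
    · exact hmono h
    · exact pvConnE_trans _ (hmono h1) (pvConnE_trans _ hedge (hmono h2))
    · exact pvConnE_trans _ (hmono h1)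
        (pvConnE_trans _ (pvConnE_symm _ hedge) (hmono h2))

def pvUFInv (n : Int) (E : List (Int × Int)) (parent : List Int) : Prop :=
  (parent.length : Int) = n ∧
  (∀ e ∈ E, (0 ≤ e.1 ∧ e.1 < n) ∧ (0 ≤ e.2 ∧ e.2 < n)) ∧
  pvDecr parent ∧
  (∀ x, 0 ≤ x → x < n →
    pvConnE E x (pvRoot parent x) ∧ ∀ y, pvConnE E x y → pvRoot parent x ≤ y)

theorem pvConnE_range {n : Int} {E : List (Int × Int)}
    (hE : ∀ e ∈ E, (0 ≤ e.1 ∧ e.1 < n) ∧ (0 ≤ e.2 ∧ e.2 < n)) {x y : Int}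
    (h : pvConnE E x y) : x = y ∨ ((0 ≤ x ∧ x < n) ∧ (0 ≤ y ∧ y < n)) := by
  induction h with
  | rel a b hab =>
    rcases hab with h | h
    · exact Or.inr ⟨(hE _ h).1, (hE _ h).2⟩
    · exact Or.inr ⟨(hE _ h).2, (hE _ h).1⟩
  | refl a => exact Or.inl rfl
  | symm a b _ ih =>
    rcases ih with h | h
    · exact Or.inl h.symm
    · exact Or.inr ⟨h.2, h.1⟩
  | trans a b c _ _ ih1 ih2 =>
    rcases ih1 with h1 | h1 <;> rcases ih2 with h2 | h2
    · exact Or.inl (h1.trans h2)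
    · exact Or.inr (h1 ▸ h2)
    · exact Or.inr (h2 ▸ h1)
    · exact Or.inr ⟨h1.1, h2.2⟩

theorem pvRoot_congr {n : Int} {E : List (Int × Int)} {parent : List Int}
    (hinv : pvUFInv n E parent) {x y : Int} (hx : 0 ≤ x ∧ x < n) (hy : 0 ≤ y ∧ y < n)
    (h : pvConnE E x y) : pvRoot parent x = pvRoot parent y := by
  obtain ⟨-, -, -, hchar⟩ := hinv
  obtain ⟨hcx, hmx⟩ := hchar x hx.1 hx.2
  obtain ⟨hcy, hmy⟩ := hchar y hy.1 hy.2
  have h1 : pvRoot parent x ≤ pvRoot parent y :=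
    hmx _ (pvConnE_trans E h hcy)
  have h2 : pvRoot parent y ≤ pvRoot parent x :=
    hmy _ (pvConnE_trans E (pvConnE_symm E h) hcx)
  omega

theorem pvUFInv_init (n : Int) (hn : 0 ≤ n) : pvUFInv n [] (PySem.List.pyRange 0 n 1) := by
  have hlen : ((PySem.List.pyRange 0 n 1).length : Int) = n := by
    rw [PySem.List.length_pyRange_one]
    omega
  have hget : ∀ k : Nat, k < (PySem.List.pyRange 0 n 1).length →
      (PySem.List.pyRange 0 n 1).getD k 0 = (k : Int) := by
    intro k hk
    rw [List.getD_eq_getElem?_getD, List.getElem?_eq_getElem hk]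
    simp only [Option.getD_some]
    rw [PySem.List.getElem_pyRange_one]
    omega
  have hdec : pvDecr (PySem.List.pyRange 0 n 1) := by
    intro k hk
    rw [hget k hk]
    omega
  refine ⟨hlen, by simp, hdec, ?_⟩
  intro x h0 h1
  have hfix : (PySem.List.pyRange 0 n 1).getD x.toNat 0 = x := by
    rw [hget x.toNat (by omega)]
    omega
  have hroot : pvRoot (PySem.List.pyRange 0 n 1) x = x :=
    pvRoot_fixpoint _ h0 (by omega) hfix
  rw [hroot]
  exact ⟨pvConnE_refl [] x, fun y hy => le_of_eq (pvConnE_nil hy)⟩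

theorem pvUnion_inv {n : Int} {E : List (Int × Int)} {parent : List Int}
    (hinv : pvUFInv n E parent) {a b : Int} (ha : 0 ≤ a ∧ a < n) (hb : 0 ≤ b ∧ b < n) :
    pvUFInv n (E ++ [(a, b)]) (pvUnion parent a b) := by
  obtain ⟨hlen, hE, hdec, hchar⟩ := hinv
  have hE' : ∀ e ∈ E ++ [(a, b)], (0 ≤ e.1 ∧ e.1 < n) ∧ (0 ≤ e.2 ∧ e.2 < n) := by
    intro e he
    rcases List.mem_append.1 he with he | he
    · exact hE e he
    · rcases List.mem_singleton.1 he with rfl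
      exact ⟨ha, hb⟩
  obtain ⟨hca, hma⟩ := hchar a ha.1 ha.2
  obtain ⟨hcb, hmb⟩ := hchar b hb.1 hb.2
  obtain ⟨hra0, hraa, hrafix⟩ := pvRoot_spec parent hdec a.toNat a ha.1 (by omega) (le_refl _)
  obtain ⟨hrb0, hrbb, hrbfix⟩ := pvRoot_spec parent hdec b.toNat b hb.1 (by omega) (le_refl _)
  -- the new connectivity, decomposed
  have hdecomp : ∀ x y, pvConnE (E ++ [(a, b)]) x y ↔
      pvConnE E x y ∨ (pvConnE E x a ∧ pvConnE E b y) ∨ (pvConnE E x b ∧ pvConnE E a y) :=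
    fun x y => pvConnE_append
  have hmono : ∀ {x y : Int}, pvConnE E x y → pvConnE (E ++ [(a, b)]) x y :=
    fun h => pvConnE_mono (fun f hf => List.mem_append.2 (Or.inl hf)) h
  have hconn_ab : pvConnE (E ++ [(a, b)]) a b :=
    Relation.EqvGen.rel _ _ (Or.inl (List.mem_append.2 (Or.inr (by simp))))
  rcases lt_trichotomy (pvRoot parent a) (pvRoot parent b) with hlt | heq | hgt
  · -- union sets parent[root b] := root a
    have hset : pvUnion parent a b = parent.set (pvRoot parent b).toNat (pvRoot parent a) := by
      simp only [pvUnion]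
      rw [if_pos hlt]
    have hupd := pvRoot_update parent hdec hra0 hlt (by omega) hrbfix hrafix
    refine ⟨by rw [hset]; simp [List.length_set]; omega, hE', by rw [hset]; exact pvDecr_set parent hdec hra0 (le_of_lt hlt), ?_⟩
    intro x h0 h1
    rw [hset, hupd x.toNat x h0 (by omega) (le_refl _)]
    obtain ⟨hcx, hmx⟩ := hchar x h0 h1
    by_cases hxb : pvRoot parent x = pvRoot parent b
    · rw [if_pos hxb]
      constructor
      · -- x ~ root x = root b ~ b ~ a ~ root a
        refine pvConnE_trans _ (hmono (hxb ▸ hcx)) ?_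
        refine pvConnE_trans _ (pvConnE_symm _ (hmono hcb)) ?_
        exact pvConnE_trans _ (pvConnE_symm _ hconn_ab) (hmono hca)
      · intro y hy
        rcases (hdecomp x y).1 hy with h | ⟨h1', h2'⟩ | ⟨h1', h2'⟩
        · have := hmx y h
          omega
        · have := hmb y h2'
          omega
        · have := hma y h2'
          omega
    · rw [if_neg hxb]
      constructor
      · exact hmono hcx
      · intro y hy
        rcases (hdecomp x y).1 hy with h | ⟨h1', h2'⟩ | ⟨h1', h2'⟩
        · exact hmx y h
        · -- x ~ a so root x = root a; y ~ b so root a = root x ≤ ... use root b min on y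
          have hxa : pvRoot parent x = pvRoot parent a := by
            rcases pvConnE_range hE h1' with rfl | ⟨hx2, ha2⟩
            · rfl
            · exact pvRoot_congr ⟨hlen, hE, hdec, hchar⟩ hx2 ha2 h1'
          have := hmb y h2'
          omega
        · -- x ~ b contradicts root x ≠ root b? no: gives root x = root b, contradiction with hxb
          exfalso
          apply hxb
          rcases pvConnE_range hE h1' with rfl | ⟨hx2, hb2⟩
          · rfl
          · exact pvRoot_congr ⟨hlen, hE, hdec, hchar⟩ hx2 hb2 h1'
  · -- roots equal: parent unchanged
    have hset : pvUnion parent a b = parent := by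
      simp only [pvUnion]
      rw [if_neg (by omega), if_neg (by omega)]
    rw [hset]
    refine ⟨hlen, hE', hdec, ?_⟩
    intro x h0 h1
    obtain ⟨hcx, hmx⟩ := hchar x h0 h1
    refine ⟨hmono hcx, ?_⟩
    intro y hy
    rcases (hdecomp x y).1 hy with h | ⟨h1', h2'⟩ | ⟨h1', h2'⟩
    · exact hmx y h
    · have hxa : pvRoot parent x = pvRoot parent a := by
        rcases pvConnE_range hE h1' with rfl | ⟨hx2, ha2⟩
        · rfl
        · exact pvRoot_congr ⟨hlen, hE, hdec, hchar⟩ hx2 ha2 h1'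
      have := hmb y h2'
      omega
    · have hxb : pvRoot parent x = pvRoot parent b := by
        rcases pvConnE_range hE h1' with rfl | ⟨hx2, hb2⟩
        · rfl
        · exact pvRoot_congr ⟨hlen, hE, hdec, hchar⟩ hx2 hb2 h1'
      have := hma y h2'
      omega
  · -- symmetric: sets parent[root a] := root b
    have hset : pvUnion parent a b = parent.set (pvRoot parent a).toNat (pvRoot parent b) := by
      simp only [pvUnion]
      rw [if_neg (by omega), if_pos hgt]
    have hupd := pvRoot_update parent hdec hrb0 hgt (by omega) hrafix hrbfix
    refine ⟨by rw [hset]; simp [List.length_set]; omega, hE', by rw [hset]; exact pvDecr_set parent hdec hrb0 (le_of_lt hgt), ?_⟩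
    intro x h0 h1
    rw [hset, hupd x.toNat x h0 (by omega) (le_refl _)]
    obtain ⟨hcx, hmx⟩ := hchar x h0 h1
    by_cases hxa : pvRoot parent x = pvRoot parent a
    · rw [if_pos hxa]
      constructor
      · refine pvConnE_trans _ (hmono (hxa ▸ hcx)) ?_
        refine pvConnE_trans _ (pvConnE_symm _ (hmono hca)) ?_
        exact pvConnE_trans _ hconn_ab (hmono hcb)
      · intro y hy
        rcases (hdecomp x y).1 hy with h | ⟨h1', h2'⟩ | ⟨h1', h2'⟩
        · have := hmx y h
          omega
        · have := hmb y h2'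
          omega
        · have := hma y h2'
          omega
    · rw [if_neg hxa]
      constructor
      · exact hmono hcx
      · intro y hy
        rcases (hdecomp x y).1 hy with h | ⟨h1', h2'⟩ | ⟨h1', h2'⟩
        · exact hmx y h
        · exfalso
          apply hxa
          rcases pvConnE_range hE h1' with rfl | ⟨hx2, ha2⟩
          · rfl
          · exact pvRoot_congr ⟨hlen, hE, hdec, hchar⟩ hx2 ha2 h1'
        · have hxb : pvRoot parent x = pvRoot parent b := by
            rcases pvConnE_range hE h1' with rfl | ⟨hx2, hb2⟩
            · rfl
            · exact pvRoot_congr ⟨hlen, hE, hdec, hchar⟩ hx2 hb2 h1'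
          have := hma y h2'
          omega

-- ---- B side: row-major index, grid edges ----
def pvN (g : List (List Int)) : Int := pvRows g * pvCols g

theorem pvIdx_bounds (g : List (List Int)) {p : Int × Int} (h : pvInR g p) :
    0 ≤ pvIdx g p ∧ pvIdx g p < pvN g := by
  obtain ⟨h1, h2, h3, h4⟩ := h
  have hC : 0 ≤ pvCols g := by omega
  constructor
  · have := mul_nonneg h1 hC
    rw [pvIdx]
    omega
  · have hstep : pvIdx g p < (p.1 + 1) * pvCols g := by
      rw [pvIdx, add_mul]
      omega
    have : (p.1 + 1) * pvCols g ≤ pvRows g * pvCols g :=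
      mul_le_mul_of_nonneg_right (by omega) hC
    rw [pvN]
    omega

theorem pvIdx_lt (g : List (List Int)) {p q : Int × Int} (hp : pvInR g p) (hq : pvInR g q)
    (h : pvRmLt p q) : pvIdx g p < pvIdx g q := by
  obtain ⟨a1, a2, a3, a4⟩ := hp
  obtain ⟨b1, b2, b3, b4⟩ := hq
  have hC : 0 ≤ pvCols g := by omega
  rcases h with h | ⟨h1, h2⟩
  · have hs : pvIdx g p < (p.1 + 1) * pvCols g := by
      rw [pvIdx, add_mul]
      omega
    have hm : (p.1 + 1) * pvCols g ≤ q.1 * pvCols g :=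
      mul_le_mul_of_nonneg_right (by omega) hC
    have : q.1 * pvCols g ≤ pvIdx g q := by
      rw [pvIdx]
      omega
    omega
  · have : p.1 * pvCols g = q.1 * pvCols g := by rw [h1]
    rw [pvIdx, pvIdx]
    omega

theorem pvRm_trichotomy (p q : Int × Int) : pvRmLt p q ∨ p = q ∨ pvRmLt q p := by
  rcases lt_trichotomy p.1 q.1 with h | h | h
  · exact Or.inl (Or.inl h)
  · rcases lt_trichotomy p.2 q.2 with h2 | h2 | h2
    · exact Or.inl (Or.inr ⟨h, h2⟩)
    · exact Or.inr (Or.inl (Prod.ext h h2))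
    · exact Or.inr (Or.inr (Or.inr ⟨h.symm, h2⟩))
  · exact Or.inr (Or.inr (Or.inl h))

theorem pvIdx_inj (g : List (List Int)) {p q : Int × Int} (hp : pvInR g p) (hq : pvInR g q)
    (h : pvIdx g p = pvIdx g q) : p = q := by
  rcases pvRm_trichotomy p q with ht | ht | ht
  · have := pvIdx_lt g hp hq ht
    omega
  · exact ht
  · have := pvIdx_lt g hq hp ht
    omega

theorem pvIdx_surj (g : List (List Int)) {x : Int} (h0 : 0 ≤ x) (h1 : x < pvN g) :
    ∃ p, pvInR g p ∧ pvIdx g p = x := by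
  have hC0 : (0 : Int) ≤ pvCols g := by rw [pvCols]; positivity
  have hC : 0 < pvCols g := by
    rcases lt_or_eq_of_le hC0 with h | h
    · exact h
    · exfalso
      have : pvN g = 0 := by rw [pvN, ← h, mul_zero]
      omega
  refine ⟨(x / pvCols g, x % pvCols g), ⟨Int.ediv_nonneg h0 (by omega), ?_,
    Int.emod_nonneg x (by omega), Int.emod_lt_of_pos x hC⟩, ?_⟩
  · have h1' : x < pvRows g * pvCols g := h1
    rw [Int.ediv_lt_iff_lt_mul hC]
    nlinarith
  · show x / pvCols g * pvCols g + x % pvCols g = x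
    have h2 := Int.emod_add_ediv x (pvCols g)
    have hcomm : pvCols g * (x / pvCols g) = x / pvCols g * pvCols g := mul_comm _ _
    omega

noncomputable def pvCellEdges (g : List (List Int)) (p : Int × Int) : List (Int × Int) :=
  (@ite _ (pvFive g p ∧ pvFive g (p.1 - 1, p.2)) (Classical.propDecidable _)
    [(pvIdx g p, pvIdx g (p.1 - 1, p.2))] []) ++
  (@ite _ (pvFive g p ∧ pvFive g (p.1, p.2 - 1)) (Classical.propDecidable _)
    [(pvIdx g p, pvIdx g (p.1, p.2 - 1))] [])

noncomputable def pvEdges (g : List (List Int)) (P : List (Int × Int)) : List (Int × Int) :=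
  P.flatMap (pvCellEdges g)

theorem pv_edges_append (g : List (List Int)) (P : List (Int × Int)) (x : Int × Int) :
    pvEdges g (P ++ [x]) = pvEdges g P ++ pvCellEdges g x := by
  simp [pvEdges]

theorem pv_mem_cellEdges (g : List (List Int)) (x : Int × Int) (e : Int × Int) :
    e ∈ pvCellEdges g x ↔
      (pvFive g x ∧ pvFive g (x.1 - 1, x.2) ∧ e = (pvIdx g x, pvIdx g (x.1 - 1, x.2))) ∨
      (pvFive g x ∧ pvFive g (x.1, x.2 - 1) ∧ e = (pvIdx g x, pvIdx g (x.1, x.2 - 1))) := by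
  rw [pvCellEdges, List.mem_append]
  constructor
  · rintro (h | h)
    · split_ifs at h with hc
      · rcases List.mem_singleton.1 h with rfl
        exact Or.inl ⟨hc.1, hc.2, rfl⟩
      · simp at h
    · split_ifs at h with hc
      · rcases List.mem_singleton.1 h with rfl
        exact Or.inr ⟨hc.1, hc.2, rfl⟩
      · simp at h
  · rintro (⟨h1, h2, rfl⟩ | ⟨h1, h2, rfl⟩)
    · left
      rw [if_pos ⟨h1, h2⟩]
      simp
    · right
      rw [if_pos ⟨h1, h2⟩]
      simp

theorem pv_cellEdges_range (g : List (List Int)) (x : Int × Int) :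
    ∀ e ∈ pvCellEdges g x, (0 ≤ e.1 ∧ e.1 < pvN g) ∧ (0 ≤ e.2 ∧ e.2 < pvN g) := by
  intro e he
  rcases (pv_mem_cellEdges g x e).1 he with ⟨h1, h2, rfl⟩ | ⟨h1, h2, rfl⟩ <;>
    exact ⟨pvIdx_bounds g h1.1, pvIdx_bounds g h2.1⟩

def pvStepB (g : List (List Int)) (parent : List Int) (pc : Int × Int) : List Int :=
  if pvGet g pc.1 pc.2 = 5 then
    let parent' := if 0 < pc.1 ∧ pvGet g (pc.1 - 1) pc.2 = 5 then
      pvUnion parent (pc.1 * pvCols g + pc.2) ((pc.1 - 1) * pvCols g + pc.2) else parent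
    if 0 < pc.2 ∧ pvGet g pc.1 (pc.2 - 1) = 5 then
      pvUnion parent' (pc.1 * pvCols g + pc.2) (pc.1 * pvCols g + pc.2 - 1) else parent'
  else parent

theorem pv_stepB_inv (g : List (List Int)) {E : List (Int × Int)} {parent : List Int}
    (x : Int × Int) (hx : pvInR g x) (hinv : pvUFInv (pvN g) E parent) :
    pvUFInv (pvN g) (E ++ pvCellEdges g x) (pvStepB g parent x) := by
  have hup_cell : pvFive g (x.1 - 1, x.2) ↔ (0 < x.1 ∧ pvGet g (x.1 - 1) x.2 = 5) := by
    obtain ⟨a1, a2, a3, a4⟩ := hx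
    constructor
    · rintro ⟨⟨b1, b2, b3, b4⟩, b5⟩
      exact ⟨by omega, b5⟩
    · rintro ⟨b1, b2⟩
      exact ⟨⟨by omega, by omega, a3, a4⟩, b2⟩
  have hleft_cell : pvFive g (x.1, x.2 - 1) ↔ (0 < x.2 ∧ pvGet g x.1 (x.2 - 1) = 5) := by
    obtain ⟨a1, a2, a3, a4⟩ := hx
    constructor
    · rintro ⟨⟨b1, b2, b3, b4⟩, b5⟩
      exact ⟨by omega, b5⟩
    · rintro ⟨b1, b2⟩
      exact ⟨⟨a1, a2, by omega, by omega⟩, b2⟩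
  have hxx : pvIdx g x = x.1 * pvCols g + x.2 := rfl
  have hxup : pvIdx g (x.1 - 1, x.2) = (x.1 - 1) * pvCols g + x.2 := rfl
  have hxleft : pvIdx g (x.1, x.2 - 1) = x.1 * pvCols g + x.2 - 1 := by
    show x.1 * pvCols g + (x.2 - 1) = x.1 * pvCols g + x.2 - 1
    omega
  by_cases h5 : pvGet g x.1 x.2 = 5
  · have hfx : pvFive g x := ⟨hx, h5⟩
    by_cases hup : 0 < x.1 ∧ pvGet g (x.1 - 1) x.2 = 5 <;>
      by_cases hleft : 0 < x.2 ∧ pvGet g x.1 (x.2 - 1) = 5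
    · -- both edges
      have hstep : pvStepB g parent x =
          pvUnion (pvUnion parent (pvIdx g x) (pvIdx g (x.1 - 1, x.2)))
            (pvIdx g x) (pvIdx g (x.1, x.2 - 1)) := by
        simp only [pvStepB]
        rw [if_pos h5, if_pos hup, if_pos hleft, hxx, hxup, hxleft]
      have hedges : pvCellEdges g x =
          [(pvIdx g x, pvIdx g (x.1 - 1, x.2))] ++ [(pvIdx g x, pvIdx g (x.1, x.2 - 1))] := by
        rw [pvCellEdges, if_pos ⟨hfx, hup_cell.2 hup⟩, if_pos ⟨hfx, hleft_cell.2 hleft⟩]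
      rw [hstep, hedges]
      have h1 := pvUnion_inv hinv (pvIdx_bounds g hx) (pvIdx_bounds g (hup_cell.2 hup).1)
      have h2 := pvUnion_inv h1 (pvIdx_bounds g hx) (pvIdx_bounds g (hleft_cell.2 hleft).1)
      rw [← List.append_assoc] at *
      exact h2
    · -- only up edge
      have hstep : pvStepB g parent x =
          pvUnion parent (pvIdx g x) (pvIdx g (x.1 - 1, x.2)) := by
        simp only [pvStepB]
        rw [if_pos h5, if_pos hup, if_neg hleft, hxx, hxup]
      have hedges : pvCellEdges g x = [(pvIdx g x, pvIdx g (x.1 - 1, x.2))] := by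
        rw [pvCellEdges, if_pos ⟨hfx, hup_cell.2 hup⟩,
          if_neg (fun hc => hleft (hleft_cell.1 hc.2))]
        simp
      rw [hstep, hedges]
      exact pvUnion_inv hinv (pvIdx_bounds g hx) (pvIdx_bounds g (hup_cell.2 hup).1)
    · -- only left edge
      have hstep : pvStepB g parent x =
          pvUnion parent (pvIdx g x) (pvIdx g (x.1, x.2 - 1)) := by
        simp only [pvStepB]
        rw [if_pos h5, if_neg hup, if_pos hleft, hxx, hxleft]
      have hedges : pvCellEdges g x = [(pvIdx g x, pvIdx g (x.1, x.2 - 1))] := by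
        rw [pvCellEdges, if_neg (fun hc => hup (hup_cell.1 hc.2)),
          if_pos ⟨hfx, hleft_cell.2 hleft⟩]
        simp
      rw [hstep, hedges]
      exact pvUnion_inv hinv (pvIdx_bounds g hx) (pvIdx_bounds g (hleft_cell.2 hleft).1)
    · -- no edges
      have hstep : pvStepB g parent x = parent := by
        simp only [pvStepB]
        rw [if_pos h5, if_neg hup, if_neg hleft]
      have hedges : pvCellEdges g x = [] := by
        rw [pvCellEdges, if_neg (fun hc => hup (hup_cell.1 hc.2)),
          if_neg (fun hc => hleft (hleft_cell.1 hc.2))]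
        simp
      rw [hstep, hedges, List.append_nil]
      exact hinv
  · have hstep : pvStepB g parent x = parent := by
      simp only [pvStepB]
      rw [if_neg h5]
    have hedges : pvCellEdges g x = [] := by
      rw [pvCellEdges, if_neg (fun hc => h5 hc.1.2), if_neg (fun hc => h5 hc.1.2)]
      simp
    rw [hstep, hedges, List.append_nil]
    exact hinv

theorem pv_buildScan (g : List (List Int)) :
    ∀ (S P : List (Int × Int)), pvCellsRM g = P ++ S → ∀ parent,
      pvUFInv (pvN g) (pvEdges g P) parent →
      pvUFInv (pvN g) (pvEdges g (P ++ S)) (S.foldl (pvStepB g) parent) := by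
  intro S
  induction S with
  | nil =>
    intro P hsplit parent hinv
    simpa using hinv
  | cons x S ih =>
    intro P hsplit parent hinv
    have hx : pvInR g x := (pv_mem_cellsRM g x).1 (by rw [hsplit]; simp)
    have hstep := pv_stepB_inv g x hx hinv
    rw [← pv_edges_append] at hstep
    have := ih (P ++ [x]) (by simpa using hsplit) (pvStepB g parent x) hstep
    rw [List.foldl_cons]
    simpa using this

theorem pv_build_inv (g : List (List Int)) :
    pvUFInv (pvN g) (pvEdges g (pvCellsRM g))
      (pvBuildParent g (pvRows g) (pvCols g)) := by
  have hb : pvBuildParent g (pvRows g) (pvCols g) =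
      (pvCellsRM g).foldl (pvStepB g) (PySem.List.pyRange 0 (pvN g) 1) :=
    pv_foldl_nested (pvStepB g) (PySem.List.pyRange 0 (pvRows g) 1)
      (PySem.List.pyRange 0 (pvCols g) 1) (PySem.List.pyRange 0 (pvN g) 1)
  rw [hb]
  have hn : 0 ≤ pvN g := by
    rw [pvN]
    have h1 : (0 : Int) ≤ pvRows g := by rw [pvRows]; positivity
    have h2 : (0 : Int) ≤ pvCols g := by rw [pvCols]; positivity
    exact mul_nonneg h1 h2
  have := pv_buildScan g (pvCellsRM g) [] rfl (PySem.List.pyRange 0 (pvN g) 1)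
    (by rw [show pvEdges g [] = [] from rfl]; exact pvUFInv_init (pvN g) hn)
  simpa using this

-- ---- B side: grid connectivity equals index connectivity ----
theorem pv_edges_range (g : List (List Int)) :
    ∀ e ∈ pvEdges g (pvCellsRM g), (0 ≤ e.1 ∧ e.1 < pvN g) ∧ (0 ≤ e.2 ∧ e.2 < pvN g) := by
  intro e he
  rw [pvEdges, List.mem_flatMap] at he
  obtain ⟨x, -, he⟩ := he
  exact pv_cellEdges_range g x e he

theorem pv_conn_to_connE (g : List (List Int)) {p q : Int × Int} (h : pvConn g p q) :
    pvConnE (pvEdges g (pvCellsRM g)) (pvIdx g p) (pvIdx g q) := by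
  induction h with
  | rel x y hxy =>
    have h5x := hxy.1
    have h5y := hxy.2.1
    have hxcells : x ∈ pvCellsRM g := (pv_mem_cellsRM g x).2 h5x.1
    have hycells : y ∈ pvCellsRM g := (pv_mem_cellsRM g y).2 h5y.1
    obtain ⟨-, -, hsh⟩ := hxy
    rcases hsh with ⟨h1, h2 | h2⟩ | ⟨h1, h2 | h2⟩
    · -- y is right neighbour of x: edge from y to its left neighbour x
      have hyx : (x.1, x.2) = (y.1, y.2 - 1) := by simp only [Prod.mk.injEq]; omega
      have hedge : (pvIdx g y, pvIdx g x) ∈ pvEdges g (pvCellsRM g) := by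
        rw [pvEdges, List.mem_flatMap]
        refine ⟨y, hycells, (pv_mem_cellEdges g y _).2 (Or.inr ⟨h5y, ?_, ?_⟩)⟩
        · rw [← hyx]
          simpa using h5x
        · rw [← hyx]
      exact Relation.EqvGen.rel _ _ (Or.inr hedge)
    · -- y is the left neighbour of x
      have hxy2 : (y.1, y.2) = (x.1, x.2 - 1) := by simp only [Prod.mk.injEq]; omega
      have hedge : (pvIdx g x, pvIdx g y) ∈ pvEdges g (pvCellsRM g) := by
        rw [pvEdges, List.mem_flatMap]
        refine ⟨x, hxcells, (pv_mem_cellEdges g x _).2 (Or.inr ⟨h5x, ?_, ?_⟩)⟩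
        · rw [← hxy2]
          simpa using h5y
        · rw [← hxy2]
      exact Relation.EqvGen.rel _ _ (Or.inl hedge)
    · -- y is below x: edge from y up to x
      have hyx : (x.1, x.2) = (y.1 - 1, y.2) := by simp only [Prod.mk.injEq]; omega
      have hedge : (pvIdx g y, pvIdx g x) ∈ pvEdges g (pvCellsRM g) := by
        rw [pvEdges, List.mem_flatMap]
        refine ⟨y, hycells, (pv_mem_cellEdges g y _).2 (Or.inl ⟨h5y, ?_, ?_⟩)⟩
        · rw [← hyx]
          simpa using h5x
        · rw [← hyx]
      exact Relation.EqvGen.rel _ _ (Or.inr hedge)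
    · -- y is above x
      have hxy2 : (y.1, y.2) = (x.1 - 1, x.2) := by simp only [Prod.mk.injEq]; omega
      have hedge : (pvIdx g x, pvIdx g y) ∈ pvEdges g (pvCellsRM g) := by
        rw [pvEdges, List.mem_flatMap]
        refine ⟨x, hxcells, (pv_mem_cellEdges g x _).2 (Or.inl ⟨h5x, ?_, ?_⟩)⟩
        · rw [← hxy2]
          simpa using h5y
        · rw [← hxy2]
      exact Relation.EqvGen.rel _ _ (Or.inl hedge)
  | refl x => exact pvConnE_refl _ _
  | symm x y _ ih => exact pvConnE_symm _ ih
  | trans x y z _ _ ih1 ih2 => exact pvConnE_trans _ ih1 ih2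

theorem pv_connE_to_conn (g : List (List Int)) :
    ∀ {a b : Int}, pvConnE (pvEdges g (pvCellsRM g)) a b →
      ∀ {p q : Int × Int}, pvInR g p → pvInR g q → pvIdx g p = a → pvIdx g q = b →
        pvConn g p q := by
  intro a b h
  induction h with
  | rel a b hab =>
    intro p q hp hq hpa hqb
    have hdecode : ∀ {c d : Int}, (c, d) ∈ pvEdges g (pvCellsRM g) →
        ∀ {u v : Int × Int}, pvInR g u → pvInR g v → pvIdx g u = c → pvIdx g v = d →
          pvAdj g u v := by
      intro c d hcd u v hu hv huc hvd
      rw [pvEdges, List.mem_flatMap] at hcd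
      obtain ⟨x, -, he⟩ := hcd
      rcases (pv_mem_cellEdges g x _).1 he with ⟨h1, h2, he2⟩ | ⟨h1, h2, he2⟩
      · have hc : c = pvIdx g x := congrArg Prod.fst he2
        have hd : d = pvIdx g (x.1 - 1, x.2) := congrArg Prod.snd he2
        have hux : u = x := pvIdx_inj g hu h1.1 (by rw [huc, hc])
        have hvx : v = (x.1 - 1, x.2) := pvIdx_inj g hv h2.1 (by rw [hvd, hd])
        subst hux
        refine ⟨h1, hvx ▸ h2, Or.inr ⟨?_, ?_⟩⟩
        · rw [hvx]
        · right
          rw [hvx]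
      · have hc : c = pvIdx g x := congrArg Prod.fst he2
        have hd : d = pvIdx g (x.1, x.2 - 1) := congrArg Prod.snd he2
        have hux : u = x := pvIdx_inj g hu h1.1 (by rw [huc, hc])
        have hvx : v = (x.1, x.2 - 1) := pvIdx_inj g hv h2.1 (by rw [hvd, hd])
        subst hux
        refine ⟨h1, hvx ▸ h2, Or.inl ⟨?_, ?_⟩⟩
        · rw [hvx]
        · right
          rw [hvx]
    rcases hab with h | h
    · exact Relation.EqvGen.rel _ _ (hdecode h hp hq hpa hqb)
    · exact pv_conn_symm g (Relation.EqvGen.rel _ _ (hdecode h hq hp hqb hpa))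
  | refl a =>
    intro p q hp hq hpa hqb
    have : p = q := pvIdx_inj g hp hq (by rw [hpa, hqb])
    rw [this]
    exact pv_conn_refl g q
  | symm a b hab ih =>
    intro p q hp hq hpa hqb
    exact pv_conn_symm g (ih hq hp hqb hpa)
  | trans a b c hab hbc ih1 ih2 =>
    intro p q hp hq hpa hqc
    rcases pvConnE_range (pv_edges_range g) hab with rfl | ⟨ha2, hb2⟩
    · exact ih2 hp hq hpa hqc
    · obtain ⟨m, hm, hmb⟩ := pvIdx_surj g hb2.1 hb2.2
      exact pv_conn_trans g (ih1 hp hm hpa hmb) (ih2 hm hq hmb hqc)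

theorem pv_min_unique (g : List (List Int)) {m m' : Int × Int} (h1 : pvIsMin g m)
    (h2 : pvIsMin g m') (hc : pvConn g m m') : m = m' := by
  have ha := h1.2 m' h2.1 hc
  have hb := h2.2 m h1.1 (pv_conn_symm g hc)
  rcases pvRm_trichotomy m m' with ht | ht | ht
  · exact absurd ht hb
  · exact ht
  · exact absurd ht ha

theorem pv_root_min (g : List (List Int)) {p : Int × Int} (h5 : pvFive g p) :
    ∃ m, pvIsMin g m ∧ pvConn g p m ∧
      pvRoot (pvBuildParent g (pvRows g) (pvCols g)) (pvIdx g p) = pvIdx g m := by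
  obtain ⟨hlen, hE, hdec, hchar⟩ := pv_build_inv g
  have hb := pvIdx_bounds g h5.1
  obtain ⟨hcx, hmx⟩ := hchar (pvIdx g p) hb.1 hb.2
  have hrange : 0 ≤ pvRoot (pvBuildParent g (pvRows g) (pvCols g)) (pvIdx g p) ∧
      pvRoot (pvBuildParent g (pvRows g) (pvCols g)) (pvIdx g p) < pvN g := by
    rcases pvConnE_range (pv_edges_range g) hcx with heq | ⟨-, h⟩
    · rw [← heq]
      exact hb
    · exact h
  obtain ⟨m, hm, hmi⟩ := pvIdx_surj g hrange.1 hrange.2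
  have hconn : pvConn g p m := pv_connE_to_conn g hcx h5.1 hm rfl hmi
  have h5m : pvFive g m := (pv_conn_five_iff g hconn).1 h5
  refine ⟨m, ⟨h5m, ?_⟩, hconn, hmi.symm⟩
  intro q h5q hcq hlt
  have hconnq : pvConnE (pvEdges g (pvCellsRM g)) (pvIdx g p) (pvIdx g q) :=
    pv_conn_to_connE g (pv_conn_trans g hconn hcq)
  have := hmx (pvIdx g q) hconnq
  have hqm : pvIdx g q < pvIdx g m := pvIdx_lt g h5q.1 h5m.1 hlt
  omega

-- ---- B side: the grouping dictionary ----
def pvStepG (g : List (List Int)) (parent : List Int)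
    (d : PySem.Dict Int (List (Int × Int))) (pc : Int × Int) :
    PySem.Dict Int (List (Int × Int)) :=
  if pvGet g pc.1 pc.2 = 5 then
    d.modify (pvRoot parent (pc.1 * pvCols g + pc.2)) [] (fun l => l ++ [pc])
  else d

theorem pv_mem_minsOn (g : List (List Int)) (P : List (Int × Int)) (m : Int × Int) :
    m ∈ pvMinsOn g P ↔ m ∈ P ∧ pvIsMin g m := by
  rw [pvMinsOn, List.mem_filter]
  constructor
  · rintro ⟨h1, h2⟩
    exact ⟨h1, @of_decide_eq_true _ (Classical.propDecidable _) h2⟩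
  · rintro ⟨h1, h2⟩
    exact ⟨h1, @decide_eq_true _ (Classical.propDecidable _) h2⟩

theorem pv_filterConn_append (g : List (List Int)) (P Q : List (Int × Int)) (m : Int × Int) :
    pvFilterConn g (P ++ Q) m = pvFilterConn g P m ++ pvFilterConn g Q m := by
  simp [pvFilterConn, List.filter_append]

theorem pv_filterConn_singleton_pos (g : List (List Int)) {x m : Int × Int}
    (h : pvFive g x ∧ pvConn g m x) : pvFilterConn g [x] m = [x] := by
  simp only [pvFilterConn, List.filter]
  rw [show @decide (pvFive g x ∧ pvConn g m x) (Classical.propDecidable _) = true from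
    @decide_eq_true _ (Classical.propDecidable _) h]

theorem pv_filterConn_singleton_neg (g : List (List Int)) {x m : Int × Int}
    (h : ¬ (pvFive g x ∧ pvConn g m x)) : pvFilterConn g [x] m = [] := by
  simp only [pvFilterConn, List.filter]
  rw [show @decide (pvFive g x ∧ pvConn g m x) (Classical.propDecidable _) = false from
    @decide_eq_false _ (Classical.propDecidable _) h]

theorem pv_assoc_contains (g : List (List Int)) (l : List (Int × Int))
    (val : (Int × Int) → List (Int × Int)) (k : Int) :
    (PySem.Dict.mk (l.map (fun x => (pvIdx g x, val x)))).contains k =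
      l.any (fun x => pvIdx g x == k) := by
  rw [PySem.Dict.contains, List.any_map]
  rfl

theorem pv_assoc_find (g : List (List Int)) (l : List (Int × Int))
    (val : (Int × Int) → List (Int × Int))
    (hinj : ∀ a ∈ l, ∀ b ∈ l, pvIdx g a = pvIdx g b → a = b) {m : Int × Int} (hm : m ∈ l) :
    List.find? (fun p => p.1 == pvIdx g m) (l.map (fun x => (pvIdx g x, val x))) =
      some (pvIdx g m, val m) := by
  induction l with
  | nil => simp at hm
  | cons a t ih =>
    by_cases hma : m = a
    · subst hma
      rw [List.map_cons, List.find?_cons_of_pos (by simp)]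
    · have hmt : m ∈ t := by
        rcases List.mem_cons.1 hm with h | h
        · exact absurd h hma
        · exact h
      rw [List.map_cons, List.find?_cons_of_neg ?_]
      · exact ih (fun u hu v hv => hinj u (by simp [hu]) v (by simp [hv])) hmt
      · simp only [beq_iff_eq]
        intro he
        exact hma (hinj a (by simp) m (by simp [hmt]) he).symm

theorem pv_dict_insert_fresh {d : PySem.Dict Int (List (Int × Int))} {k : Int}
    (hk : d.contains k = false) (v : List (Int × Int)) :
    (d.insert k v).items = d.items ++ [(k, v)] := by
  rw [PySem.Dict.insert, hk]
  simp

theorem pv_dict_insert_existing (g : List (List Int)) (l : List (Int × Int))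
    (val : (Int × Int) → List (Int × Int)) {m : Int × Int} (hm : m ∈ l)
    (v : List (Int × Int)) :
    ((PySem.Dict.mk (l.map (fun x => (pvIdx g x, val x)))).insert (pvIdx g m) v).items =
      l.map (fun x => if pvIdx g x = pvIdx g m then (pvIdx g m, v) else (pvIdx g x, val x)) := by
  rw [PySem.Dict.insert]
  have hc : (PySem.Dict.mk (l.map (fun x => (pvIdx g x, val x)))).contains (pvIdx g m) = true := by
    rw [pv_assoc_contains]
    exact List.any_eq_true.2 ⟨m, hm, by simp⟩
  rw [hc]
  simp only [if_true, List.map_map]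
  apply List.map_congr_left
  intro a _
  by_cases he : pvIdx g a = pvIdx g m
  · simp [Function.comp, he]
  · simp [Function.comp, he]

theorem pv_minsOn_sub (g : List (List Int)) (P : List (Int × Int)) :
    ∀ a ∈ pvMinsOn g P, ∀ b ∈ pvMinsOn g P, pvIdx g a = pvIdx g b → a = b := by
  intro a ha b hb he
  have ha' := (pv_mem_minsOn g P a).1 ha
  have hb' := (pv_mem_minsOn g P b).1 hb
  exact pvIdx_inj g ha'.2.1.1 hb'.2.1.1 he

theorem pv_groupsScan (g : List (List Int)) :
    ∀ (S P : List (Int × Int)), pvCellsRM g = P ++ S →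
      (S.foldl (pvStepG g (pvBuildParent g (pvRows g) (pvCols g)))
        (PySem.Dict.mk ((pvMinsOn g P).map (fun m => (pvIdx g m, pvFilterConn g P m))))) =
      PySem.Dict.mk ((pvMinsOn g (P ++ S)).map
        (fun m => (pvIdx g m, pvFilterConn g (P ++ S) m))) := by
  intro S
  induction S with
  | nil =>
    intro P hsplit
    simp
  | cons x S ih =>
    intro P hsplit
    obtain ⟨hxin, hbefore⟩ := pv_prefix_char g P S x hsplit
    have hsplit' : pvCellsRM g = (P ++ [x]) ++ S := by simpa using hsplit
    rw [List.foldl_cons]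
    by_cases h5 : pvGet g x.1 x.2 = 5
    · have hfx : pvFive g x := ⟨hxin, h5⟩
      obtain ⟨m, hmin, hconn, hroot⟩ := pv_root_min g hfx
      have h5m : pvFive g m := hmin.1
      have hkey : pvRoot (pvBuildParent g (pvRows g) (pvCols g)) (x.1 * pvCols g + x.2) =
          pvIdx g m := hroot
      have hstep : pvStepG g (pvBuildParent g (pvRows g) (pvCols g))
          (PySem.Dict.mk ((pvMinsOn g P).map (fun m => (pvIdx g m, pvFilterConn g P m)))) x =
          (PySem.Dict.mk ((pvMinsOn g P).map (fun m => (pvIdx g m, pvFilterConn g P m)))).insert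
            (pvIdx g m)
            (((PySem.Dict.mk ((pvMinsOn g P).map
                (fun m => (pvIdx g m, pvFilterConn g P m)))).getD (pvIdx g m) []) ++ [x]) := by
        rw [pvStepG, if_pos h5, hkey, PySem.Dict.modify]
      rw [hstep]
      by_cases hxm : x = m
      · -- x is itself the minimum of a fresh class
        have hxnotP : x ∉ P := fun hxP => pv_rmLt_asymm ((hbefore x).1 hxP).2 ((hbefore x).1 hxP).2
        have hfree : ∀ a ∈ pvMinsOn g P, pvIdx g a ≠ pvIdx g m := by
          intro a ha he
          have ha' := (pv_mem_minsOn g P a).1 ha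
          have : a = m := pvIdx_inj g ha'.2.1.1 h5m.1 he
          subst this
          exact hxnotP (hxm ▸ ha'.1)
        have hcont : (PySem.Dict.mk ((pvMinsOn g P).map
            (fun m => (pvIdx g m, pvFilterConn g P m)))).contains (pvIdx g m) = false := by
          rw [pv_assoc_contains]
          rw [List.any_eq_false]
          intro a ha
          simpa using hfree a ha
        have hgetD : (PySem.Dict.mk ((pvMinsOn g P).map
            (fun m => (pvIdx g m, pvFilterConn g P m)))).getD (pvIdx g m) [] = [] := by
          rw [PySem.Dict.getD, PySem.Dict.get?]
          have : List.find? (fun p => p.1 == pvIdx g m)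
              ((pvMinsOn g P).map (fun x => (pvIdx g x, pvFilterConn g P x))) = none := by
            rw [List.find?_eq_none]
            intro p hp
            rw [List.mem_map] at hp
            obtain ⟨a, ha, rfl⟩ := hp
            simpa using hfree a ha
          rw [this]
          rfl
        have hitems : ((PySem.Dict.mk ((pvMinsOn g P).map
            (fun m => (pvIdx g m, pvFilterConn g P m)))).insert (pvIdx g m)
              (((PySem.Dict.mk ((pvMinsOn g P).map
                (fun m => (pvIdx g m, pvFilterConn g P m)))).getD (pvIdx g m) []) ++ [x])).items =
            (pvMinsOn g P).map (fun m => (pvIdx g m, pvFilterConn g P m)) ++ [(pvIdx g m, [x])] := by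
          rw [pv_dict_insert_fresh hcont, hgetD]
          rfl
        have hminsx : pvMinsOn g (P ++ [x]) = pvMinsOn g P ++ [x] := by
          rw [pv_minsOn_append, pv_minsOn_singleton_min g x (hxm ▸ hmin)]
        have hfilterx : pvFilterConn g (P ++ [x]) x = [x] := by
          rw [pv_filterConn_append]
          have h1 : pvFilterConn g P x = [] := by
            rw [pvFilterConn, List.filter_eq_nil_iff]
            intro q hq hdec
            have hq' := @of_decide_eq_true _ (Classical.propDecidable _) hdec
            have hlt : pvRmLt q x := ((hbefore q).1 hq).2
            exact (hxm ▸ hmin).2 q hq'.1 hq'.2 hlt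
          rw [h1, pv_filterConn_singleton_pos g ⟨hfx, pv_conn_refl g x⟩]
          rfl
        have hold : ∀ a ∈ pvMinsOn g P, pvFilterConn g (P ++ [x]) a = pvFilterConn g P a := by
          intro a ha
          have ha' := (pv_mem_minsOn g P a).1 ha
          rw [pv_filterConn_append, pv_filterConn_singleton_neg g ?_, List.append_nil]
          rintro ⟨-, hconnax⟩
          have : a = m := pv_min_unique g ha'.2 hmin (hxm ▸ hconnax)
          subst this
          exact hxnotP (hxm ▸ ha'.1)
        have hstate : ((PySem.Dict.mk ((pvMinsOn g P).map
            (fun m => (pvIdx g m, pvFilterConn g P m)))).insert (pvIdx g m)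
              (((PySem.Dict.mk ((pvMinsOn g P).map
                (fun m => (pvIdx g m, pvFilterConn g P m)))).getD (pvIdx g m) []) ++ [x])) =
            PySem.Dict.mk ((pvMinsOn g (P ++ [x])).map
              (fun m => (pvIdx g m, pvFilterConn g (P ++ [x]) m))) := by
          apply PySem.Dict.ext
          rw [hitems, hminsx, List.map_append]
          congr 1
          · exact (List.map_congr_left (fun a ha => by rw [hold a ha])).symm
          · rw [List.map_singleton, hfilterx, hxm]
        rw [hstate, show P ++ x :: S = (P ++ [x]) ++ S by simp]
        exact ih (P ++ [x]) hsplit'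
      · -- x joins the existing class of m
        have hrm : pvRmLt m x := by
          have hnlt : ¬ pvRmLt x m := hmin.2 x hfx (pv_conn_symm g hconn)
          rcases pvRm_trichotomy m x with h | h | h
          · exact h
          · exact absurd h.symm hxm
          · exact absurd h hnlt
        have hmP : m ∈ P := (hbefore m).2 ⟨h5m.1, hrm⟩
        have hmmins : m ∈ pvMinsOn g P := (pv_mem_minsOn g P m).2 ⟨hmP, hmin⟩
        have hgetD : (PySem.Dict.mk ((pvMinsOn g P).map
            (fun m => (pvIdx g m, pvFilterConn g P m)))).getD (pvIdx g m) [] =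
            pvFilterConn g P m := by
          rw [PySem.Dict.getD, PySem.Dict.get?,
            pv_assoc_find g (pvMinsOn g P) _ (pv_minsOn_sub g P) hmmins]
          rfl
        have hitems := pv_dict_insert_existing g (pvMinsOn g P) (pvFilterConn g P)
          hmmins (pvFilterConn g P m ++ [x])
        have hminsx : pvMinsOn g (P ++ [x]) = pvMinsOn g P := by
          rw [pv_minsOn_append, pv_minsOn_singleton_not g x ?_, List.append_nil]
          intro hminx
          exact hminx.2 m h5m hconn hrm
        have hval : ∀ a ∈ pvMinsOn g P, pvFilterConn g (P ++ [x]) a =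
            (if pvIdx g a = pvIdx g m then pvFilterConn g P m ++ [x] else pvFilterConn g P a) := by
          intro a ha
          have ha' := (pv_mem_minsOn g P a).1 ha
          by_cases hae : a = m
          · subst hae
            rw [if_pos rfl, pv_filterConn_append,
              pv_filterConn_singleton_pos g ⟨hfx, pv_conn_symm g hconn⟩]
          · rw [if_neg (fun he => hae (pvIdx_inj g ha'.2.1.1 h5m.1 he)),
              pv_filterConn_append, pv_filterConn_singleton_neg g ?_, List.append_nil]
            rintro ⟨-, hconnax⟩
            exact hae (pv_min_unique g ha'.2 hmin (pv_conn_trans g hconnax hconn))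
        have hstate : ((PySem.Dict.mk ((pvMinsOn g P).map
            (fun m => (pvIdx g m, pvFilterConn g P m)))).insert (pvIdx g m)
              (((PySem.Dict.mk ((pvMinsOn g P).map
                (fun m => (pvIdx g m, pvFilterConn g P m)))).getD (pvIdx g m) []) ++ [x])) =
            PySem.Dict.mk ((pvMinsOn g (P ++ [x])).map
              (fun m => (pvIdx g m, pvFilterConn g (P ++ [x]) m))) := by
          apply PySem.Dict.ext
          rw [hgetD, hitems, hminsx]
          symm
          apply List.map_congr_left
          intro a ha
          rw [hval a ha]
          by_cases hae : pvIdx g a = pvIdx g m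
          · rw [if_pos hae, if_pos hae, hae]
          · rw [if_neg hae, if_neg hae]
        rw [hstate, show P ++ x :: S = (P ++ [x]) ++ S by simp]
        exact ih (P ++ [x]) hsplit'
    · have hstep : pvStepG g (pvBuildParent g (pvRows g) (pvCols g))
          (PySem.Dict.mk ((pvMinsOn g P).map (fun m => (pvIdx g m, pvFilterConn g P m)))) x =
          PySem.Dict.mk ((pvMinsOn g P).map (fun m => (pvIdx g m, pvFilterConn g P m))) := by
        rw [pvStepG, if_neg h5]
      rw [hstep]
      have hminsx : pvMinsOn g (P ++ [x]) = pvMinsOn g P := by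
        rw [pv_minsOn_append, pv_minsOn_singleton_not g x (fun hm => h5 hm.1.2), List.append_nil]
      have hold : ∀ a ∈ pvMinsOn g P, pvFilterConn g (P ++ [x]) a = pvFilterConn g P a := by
        intro a _
        rw [pv_filterConn_append, pv_filterConn_singleton_neg g (fun hc => h5 hc.1.2),
          List.append_nil]
      have hstate : PySem.Dict.mk ((pvMinsOn g P).map
            (fun m => (pvIdx g m, pvFilterConn g P m))) =
          PySem.Dict.mk ((pvMinsOn g (P ++ [x])).map
            (fun m => (pvIdx g m, pvFilterConn g (P ++ [x]) m))) := by
        apply PySem.Dict.ext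
        rw [hminsx]
        exact (List.map_congr_left (fun a ha => by rw [hold a ha])).symm
      rw [hstate, show P ++ x :: S = (P ++ [x]) ++ S by simp]
      exact ih (P ++ [x]) hsplit'

theorem pv_B_char (g : List (List Int)) :
    (pvGroups g (pvRows g) (pvCols g) (pvBuildParent g (pvRows g) (pvCols g))).values =
      (pvMins g).map (pvClassList g) := by
  have hb : pvGroups g (pvRows g) (pvCols g) (pvBuildParent g (pvRows g) (pvCols g)) =
      (pvCellsRM g).foldl (pvStepG g (pvBuildParent g (pvRows g) (pvCols g)))
        PySem.Dict.empty :=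
    pv_foldl_nested (pvStepG g (pvBuildParent g (pvRows g) (pvCols g)))
      (PySem.List.pyRange 0 (pvRows g) 1) (PySem.List.pyRange 0 (pvCols g) 1) PySem.Dict.empty
  rw [hb]
  have h0 : (PySem.Dict.empty : PySem.Dict Int (List (Int × Int))) =
      PySem.Dict.mk ((pvMinsOn g []).map (fun m => (pvIdx g m, pvFilterConn g [] m))) := rfl
  rw [h0, pv_groupsScan g (pvCellsRM g) [] rfl]
  simp only [List.nil_append, PySem.Dict.values, List.map_map]
  rw [pvMins]
  apply List.map_congr_left
  intro a _
  rfl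

-- ---- glue: components agree up to permutation, and the fill only uses extrema ----
theorem pv_min?_perm (xs ys : List Int) (h : xs.Perm ys) :
    PySem.List.min? xs (fun x => x) = PySem.List.min? ys (fun x => x) := by
  cases hx : PySem.List.min? xs (fun x => x) with
  | none =>
    rw [PySem.List.min?_eq_none_iff] at hx
    subst hx
    rw [List.Perm.eq_nil h.symm, (PySem.List.min?_eq_none_iff _ _).2 rfl]
  | some a =>
    cases hy : PySem.List.min? ys (fun x => x) with
    | none =>
      rw [PySem.List.min?_eq_none_iff] at hy
      subst hy
      rw [List.Perm.eq_nil h] at hx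
      rw [(PySem.List.min?_eq_none_iff _ _).2 rfl] at hx
      exact absurd hx (by simp)
    | some b =>
      have ha := PySem.List.min?_mem hx
      have hb := PySem.List.min?_mem hy
      have h1 := PySem.List.min?_isMin hx b (h.mem_iff.2 hb)
      have h2 := PySem.List.min?_isMin hy a (h.mem_iff.1 ha)
      simp only [Option.some.injEq]
      omega

theorem pv_max?_perm (xs ys : List Int) (h : xs.Perm ys) :
    PySem.List.max? xs (fun x => x) = PySem.List.max? ys (fun x => x) := by
  cases hx : PySem.List.max? xs (fun x => x) with
  | none =>
    rw [PySem.List.max?_eq_none_iff] at hx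
    subst hx
    rw [List.Perm.eq_nil h.symm, (PySem.List.max?_eq_none_iff _ _).2 rfl]
  | some a =>
    cases hy : PySem.List.max? ys (fun x => x) with
    | none =>
      rw [PySem.List.max?_eq_none_iff] at hy
      subst hy
      rw [List.Perm.eq_nil h] at hx
      rw [(PySem.List.max?_eq_none_iff _ _).2 rfl] at hx
      exact absurd hx (by simp)
    | some b =>
      have ha := PySem.List.max?_mem hx
      have hb := PySem.List.max?_mem hy
      have h1 := PySem.List.max?_isMax hx b (h.mem_iff.2 hb)
      have h2 := PySem.List.max?_isMax hy a (h.mem_iff.1 ha)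
      simp only [Option.some.injEq]
      omega

theorem pvFillComp_perm (g : List (List Int)) (rows cols : Int) (out : List (List Int))
    {c1 c2 : List (Int × Int)} (h : c1.Perm c2) :
    pvFillComp g rows cols out c1 = pvFillComp g rows cols out c2 := by
  have h1 : PySem.List.min? (c1.map Prod.fst) (fun x => x) =
      PySem.List.min? (c2.map Prod.fst) (fun x => x) := pv_min?_perm _ _ (h.map _)
  have h2 : PySem.List.max? (c1.map Prod.fst) (fun x => x) =
      PySem.List.max? (c2.map Prod.fst) (fun x => x) := pv_max?_perm _ _ (h.map _)
  have h3 : PySem.List.min? (c1.map Prod.snd) (fun x => x) =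
      PySem.List.min? (c2.map Prod.snd) (fun x => x) := pv_min?_perm _ _ (h.map _)
  have h4 : PySem.List.max? (c1.map Prod.snd) (fun x => x) =
      PySem.List.max? (c2.map Prod.snd) (fun x => x) := pv_max?_perm _ _ (h.map _)
  simp only [pvFillComp, h1, h2, h3, h4]

theorem pv_classList_compRel (g : List (List Int)) (m : Int × Int) :
    (pvClassList g m).Nodup ∧
      ∀ q, q ∈ pvClassList g m ↔ (pvFive g q ∧ pvConn g m q) := by
  constructor
  · exact List.Nodup.filter _ (pv_nodup_cellsRM g)
  · intro q
    rw [pvClassList, pvFilterConn, List.mem_filter]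
    constructor
    · rintro ⟨-, h2⟩
      exact @of_decide_eq_true _ (Classical.propDecidable _) h2
    · intro h
      exact ⟨(pv_mem_cellsRM g q).2 h.1.1, @decide_eq_true _ (Classical.propDecidable _) h⟩

theorem pv_zip (g : List (List Int)) :
    ∀ (l1 : List (List (Int × Int))) (l2 : List (Int × Int)), List.Forall₂ (pvCompRel g) l1 l2 →
      (∀ m ∈ l2, pvIsMin g m) →
      List.Forall₂ (fun a b => ∀ out, pvFillComp g (pvRows g) (pvCols g) out a =
        pvFillComp g (pvRows g) (pvCols g) out b) l1 (l2.map (pvClassList g)) := by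
  intro l1 l2 h
  induction h with
  | nil => intro _; exact List.Forall₂.nil
  | @cons a b l1' l2' hab htail ih =>
    intro hmins
    rw [List.map_cons]
    refine List.Forall₂.cons ?_ (ih (fun m hm => hmins m (List.mem_cons_of_mem _ hm)))
    obtain ⟨hnd, hmem⟩ := hab
    obtain ⟨hndc, hmemc⟩ := pv_classList_compRel g b
    have hperm : a.Perm (pvClassList g b) := by
      rw [List.perm_ext_iff_of_nodup hnd hndc]
      intro q
      rw [hmem q, hmemc q]
    intro out
    exact pvFillComp_perm g (pvRows g) (pvCols g) out hperm

theorem pv_foldl_fill (g : List (List Int)) :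
    ∀ {l1 l2 : List (List (Int × Int))},
      List.Forall₂ (fun a b => ∀ out, pvFillComp g (pvRows g) (pvCols g) out a =
        pvFillComp g (pvRows g) (pvCols g) out b) l1 l2 →
      ∀ out, l1.foldl (fun out comp => pvFillComp g (pvRows g) (pvCols g) out comp) out =
        l2.foldl (fun out comp => pvFillComp g (pvRows g) (pvCols g) out comp) out := by
  intro l1 l2 h
  induction h with
  | nil => intro out; rfl
  | cons hab htail ih =>
    intro out
    rw [List.foldl_cons, List.foldl_cons, hab out]
    exact ih _

-- ===== VERDICT (by name: the statement is the Claim_ definition above) =====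
theorem transform_spec : Claim_equal_transform := by
  intro g _ _
  show transform g = transform_alt g
  cases g with
  | nil => rfl
  | cons row0 rest =>
    by_cases h0 : row0 = []
    · show (if row0 = [] then [] else _) = (if row0 = [] then [] else _)
      rw [if_pos h0, if_pos h0]
    · have h1 : transform (row0 :: rest) = (pvFindComponents (row0 :: rest)).foldl
          (fun out comp => pvFillComp (row0 :: rest) (pvRows (row0 :: rest))
            (pvCols (row0 :: rest)) out comp)
          ((row0 :: rest).map (fun row => row)) := by
        show (if row0 = [] then [] else _) = _
        rw [if_neg h0]
        rfl
      have h2 : transform_alt (row0 :: rest) =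
          ((pvGroups (row0 :: rest) (pvRows (row0 :: rest)) (pvCols (row0 :: rest))
            (pvBuildParent (row0 :: rest) (pvRows (row0 :: rest))
              (pvCols (row0 :: rest)))).values).foldl
          (fun out comp => pvFillComp (row0 :: rest) (pvRows (row0 :: rest))
            (pvCols (row0 :: rest)) out comp)
          ((row0 :: rest).map (fun row => row)) := by
        show (if row0 = [] then [] else _) = _
        rw [if_neg h0]
        rfl
      rw [h1, h2, pv_B_char (row0 :: rest)]
      exact pv_foldl_fill (row0 :: rest)
        (pv_zip (row0 :: rest) _ _ (pv_A_char (row0 :: rest))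
          (fun m hm => ((pv_mem_minsOn _ _ m).1 hm).2)) _
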